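-- pv_equiv track=rewrite | github.com/ozll-zinni/Study_Algorithm | 백준/Gold/15573. 채굴/채굴(+explain).py | mining
-- ===== SOURCE A (Python) =====
-- from collections import deque
--
-- def mining(mine, n, m, k, d): #채굴 지역mine, 행/열 n,m, 필요한 쉘의 수k, 길이d
--     total = 0 #연결된 쉘개수
--     dx, dy = [-1, 1, 0, 0], [0, 0, -1, 1]
--     visited = [[False] * m for _ in range(n)]
--     queue = deque()
--
--     #경계 설정하기 위해 첫번째 행과 마지막 열 기준으로 깊이 d 이하인 쉘을 찾아 큐에 추가하고 방문 표시
--     for i in range(m): #첫번째 행의 모든 열 순회하며 깊이 d이하인 쉘 큐에 추가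
--         if mine[0][i] <= d:
--             queue.append((0, i))
--             visited[0][i] = True
--             total += 1
--     for i in range(1, n): #첫번째 열과 마지막 열의 쉘을 순회하면서 깊이 d이하인 쉘을 큐에 추가
--         if mine[i][0] <= d:
--             queue.append((i, 0))
--             visited[i][0] = True
--             total += 1
--         if mine[i][m-1] <= d:
--             queue.append((i, m-1))
--             visited[i][m-1] = True
--             total += 1
--
--     while queue: #큐에서 쉘을 하나씩 꺼나고 상하좌우로 이동하며 연결된 쉘 탐색-> BFS
--         row, col = queue.popleft()  # 큐에서 쉘을 하나씩 꺼내 상하좌우로 이동하며 연결된 쉘 탐색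
--         if total >= k:  # 필요한 쉘의 수가 k 이상이면 True 반환
--             return True
--         for i in range(4):
--             now_r, now_c = row+dx[i], col+dy[i]
--             if 0 <= now_r < n and 0 <= now_c < m:  # 새로운 위치가 유효한지 확인
--                 if mine[now_r][now_c] <= d and not visited[now_r][now_c]:  # 깊이 d 이하이며 방문하지 않은 경우
--                     visited[now_r][now_c] = True  # 방문 표시
--                     total += 1  # 연결된 쉘 개수 증가
--                     queue.append((now_r, now_c))  # 큐에 추가
--
--     return total >= k  # 탐색이 끝난 후 연결된 쉘의 수가 k 이상인지 확인
-- ===== SOURCE B (Python) =====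
-- def mining(mine, n, m, k, d):
--     # queueless fixed-point saturation instead of BFS; counts each cell once
--     marked = [[False] * m for _ in range(n)]
--     for c in range(m):
--         if mine[0][c] <= d:
--             marked[0][c] = True
--     for r in range(1, n):
--         if mine[r][0] <= d:
--             marked[r][0] = True
--         if mine[r][m-1] <= d:
--             marked[r][m-1] = True
--     changed = True
--     while changed:
--         changed = False
--         for r in range(n):
--             for c in range(m):
--                 if not marked[r][c] and mine[r][c] <= d:
--                     if (r > 0 and marked[r-1][c]) or (r+1 < n and marked[r+1][c]) \
--                        or (c > 0 and marked[r][c-1]) or (c+1 < m and marked[r][c+1]):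
--                         marked[r][c] = True
--                         changed = True
--     total = sum(row.count(True) for row in marked)
--     return total >= k
-- ===== Notes on version B (the rewrite author's own statement) =====
-- stated objective: alternative
-- what changed: Replaces the deque-based BFS with early exit by a queueless fixed-point saturation (repeated whole-grid relaxation sweeps that mark shallow cells adjacent to a marked cell) followed by a single count; no queue, no visited/total bookkeeping during traversal, and each cell is counted exactly once where A double-counts single-column seeds.
-- intended difference: On single-column inputs (m = 1) whose shallow-cell counts satisfy s0 + s' < k <= s0 + 2*s' (s0 = 1 if mine[0][0] <= d else 0, s' = number of rows 1..n-1 with mine[r][0] <= d), A seeds every shallow cell of rows 1..n-1 twice (column 0 and column m-1 coincide and the seeding loops never check visited) and returns True from the inflated total, while B counts each distinct cell once and returns False, the intended answer. — e.g. on mining([[0], [0]], 2, 1, 3, 0): A returns true, B returns false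
import Mathlib
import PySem

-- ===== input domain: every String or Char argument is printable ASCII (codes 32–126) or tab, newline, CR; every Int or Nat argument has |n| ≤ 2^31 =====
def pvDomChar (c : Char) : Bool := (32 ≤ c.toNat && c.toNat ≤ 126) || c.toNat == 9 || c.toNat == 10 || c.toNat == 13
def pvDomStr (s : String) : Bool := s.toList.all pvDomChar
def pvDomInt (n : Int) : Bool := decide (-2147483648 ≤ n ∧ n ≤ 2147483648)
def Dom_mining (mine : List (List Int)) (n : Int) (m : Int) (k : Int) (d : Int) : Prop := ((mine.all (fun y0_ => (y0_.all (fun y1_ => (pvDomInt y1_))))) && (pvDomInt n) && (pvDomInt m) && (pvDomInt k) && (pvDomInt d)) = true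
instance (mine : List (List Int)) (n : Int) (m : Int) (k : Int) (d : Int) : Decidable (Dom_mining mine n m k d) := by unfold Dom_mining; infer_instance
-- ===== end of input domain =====

-- B replaces A's early-exit BFS by queueless fixed-point saturation sweeps plus one final count
-- (objective: alternative; differs from A only on the m = 1 inputs described at D_mining below).

-- shared grid primitives (both Pythons index `mine[r][c]` and a list-of-lists Bool grid)
-- `cellD`: mine[r][c]; out-of-range default 0 is never read on Pre_mining inputs (exact shape).
def cellD (mine : List (List Int)) (r c : Nat) : Int := (mine.getD r []).getD c 0
-- grid read; default true (= "never expand here") is never read in range.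
def g2 (v : List (List Bool)) (r c : Nat) : Bool := (v.getD r []).getD c true
-- visited[r][c] = True
def s2 (v : List (List Bool)) (r c : Nat) : List (List Bool) := v.set r ((v.getD r []).set c true)
def cnt2 (v : List (List Bool)) : Nat := (v.map (fun row => row.count true)).sum
def cf2 (v : List (List Bool)) : Nat := (v.map (fun row => row.count false)).sum

-- ===== PORT A =====
-- dx, dy = [-1, 1, 0, 0], [0, 0, -1, 1], zipped
def dirsA : List (Int × Int) := [(-1, 0), (1, 0), (0, -1), (0, 1)]

-- body of A's `for i in range(4)` loop
def bfsStep (mine : List (List Int)) (N M : Nat) (d : Int) (r c : Nat)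
    (st : List (Nat × Nat) × List (List Bool) × Int) (dxy : Int × Int) :
    List (Nat × Nat) × List (List Bool) × Int :=
  let nr : Int := (r : Int) + dxy.1
  let nc : Int := (c : Int) + dxy.2
  if 0 ≤ nr ∧ nr < (N : Int) ∧ 0 ≤ nc ∧ nc < (M : Int) then
    if cellD mine nr.toNat nc.toNat ≤ d ∧ g2 st.2.1 nr.toNat nc.toNat = false then
      (st.1 ++ [(nr.toNat, nc.toNat)], s2 st.2.1 nr.toNat nc.toNat, st.2.2 + 1)
    else st
  else st

-- A's `while queue` loop; fuel 2*cf2 v + |queue| + 1 strictly dominates the loop's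
-- termination measure, so the 0/cons fuel branch is never reached from `mining`'s call.
def bfsLoop (mine : List (List Int)) (N M : Nat) (k d : Int) :
    Nat → List (Nat × Nat) → List (List Bool) → Int → Bool
  | _, [], _, t => decide (k ≤ t)
  | 0, _ :: _, _, t => decide (k ≤ t)
  | fuel + 1, (r, c) :: qs, v, t =>
    if k ≤ t then true
    else
      let st := dirsA.foldl (bfsStep mine N M d r c) (qs, v, t)
      bfsLoop mine N M k d fuel st.1 st.2.1 st.2.2

-- body of A's first seeding loop (`for i in range(m)`)
def seedStepA0 (mine : List (List Int)) (d : Int)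
    (st : List (Nat × Nat) × List (List Bool) × Int) (i : Nat) :
    List (Nat × Nat) × List (List Bool) × Int :=
  if cellD mine 0 i ≤ d then (st.1 ++ [(0, i)], s2 st.2.1 0 i, st.2.2 + 1) else st

-- body of A's second seeding loop (`for i in range(1, n)`)
def seedStepA1 (mine : List (List Int)) (d : Int) (M : Nat)
    (st : List (Nat × Nat) × List (List Bool) × Int) (i : Nat) :
    List (Nat × Nat) × List (List Bool) × Int :=
  let st1 := if cellD mine i 0 ≤ d then (st.1 ++ [(i, 0)], s2 st.2.1 i 0, st.2.2 + 1) else st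
  if cellD mine i (M - 1) ≤ d then (st1.1 ++ [(i, M - 1)], s2 st1.2.1 i (M - 1), st1.2.2 + 1) else st1

def mining (mine : List (List Int)) (n : Int) (m : Int) (k : Int) (d : Int) : Bool :=
  let N := n.toNat
  let M := m.toNat
  let st0 := (List.range M).foldl (seedStepA0 mine d) ([], List.replicate N (List.replicate M false), 0)
  let st1 := (List.range' 1 (N - 1)).foldl (seedStepA1 mine d M) st0
  bfsLoop mine N M k d (2 * cf2 st1.2.1 + st1.1.length + 1) st1.1 st1.2.1 st1.2.2

-- ===== PORT B =====
-- row-major cell order of B's nested `for r in range(n): for c in range(m)` loops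
def cellsB (N M : Nat) : List (Nat × Nat) :=
  (List.range N).flatMap (fun r => (List.range M).map (fun c => (r, c)))

-- body of B's sweep: mark an unmarked shallow cell with a marked 4-neighbour
def sweepStep (mine : List (List Int)) (N M : Nat) (d : Int)
    (st : List (List Bool) × Bool) (rc : Nat × Nat) : List (List Bool) × Bool :=
  if g2 st.1 rc.1 rc.2 = false ∧ cellD mine rc.1 rc.2 ≤ d then
    if (0 < rc.1 ∧ g2 st.1 (rc.1 - 1) rc.2 = true) ∨ (rc.1 + 1 < N ∧ g2 st.1 (rc.1 + 1) rc.2 = true) ∨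
       (0 < rc.2 ∧ g2 st.1 rc.1 (rc.2 - 1) = true) ∨ (rc.2 + 1 < M ∧ g2 st.1 rc.1 (rc.2 + 1) = true) then
      (s2 st.1 rc.1 rc.2, true)
    else st
  else st

-- one whole-grid sweep; the Bool is Python's `changed`
def sweepB (mine : List (List Int)) (N M : Nat) (d : Int) (v : List (List Bool)) :
    List (List Bool) × Bool :=
  (cellsB N M).foldl (sweepStep mine N M d) (v, false)

-- B's `while changed` loop; fuel cf2 v + 1 dominates the number of changing sweeps.
def satLoop (mine : List (List Int)) (N M : Nat) (d : Int) : Nat → List (List Bool) → List (List Bool)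
  | 0, v => v
  | f + 1, v =>
    let st := sweepB mine N M d v
    if st.2 then satLoop mine N M d f st.1 else st.1

-- B's seeding loops (same seed cells, grid only)
def seedStepB0 (mine : List (List Int)) (d : Int) (v : List (List Bool)) (c : Nat) :
    List (List Bool) :=
  if cellD mine 0 c ≤ d then s2 v 0 c else v

def seedStepB1 (mine : List (List Int)) (d : Int) (M : Nat) (v : List (List Bool)) (r : Nat) :
    List (List Bool) :=
  let v1 := if cellD mine r 0 ≤ d then s2 v r 0 else v
  if cellD mine r (M - 1) ≤ d then s2 v1 r (M - 1) else v1

def mining_alt (mine : List (List Int)) (n : Int) (m : Int) (k : Int) (d : Int) : Bool :=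
  let N := n.toNat
  let M := m.toNat
  let v0 := (List.range M).foldl (seedStepB0 mine d) (List.replicate N (List.replicate M false))
  let v1 := (List.range' 1 (N - 1)).foldl (seedStepB1 mine d M) v0
  decide (k ≤ (cnt2 (satLoop mine N M d (cf2 v1 + 1) v1) : Int))

-- ===== PRECONDITION & SPEC =====
-- Pre_mining admits (a) proper grids: (n, m) describes an n-by-m region actually present in
-- `mine` (extra rows / longer rows are never read), and (b) the degenerate loop ranges n <= 0 /
-- m <= 0 on which A's loops run empty (or scan without finding a cell <= d) and A returns
-- total >= k with total = 0.  It excludes inputs on which Python A raises IndexError (missing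
-- rows/columns of the scanned region, or a shallow cell found where `visited` has no slot) and
-- the negative-index wraparound reads with m <= 0 that find a cell <= d, where A's value is an
-- accident of Python indexing.
def Pre_mining (mine : List (List Int)) (n : Int) (m : Int) (k : Int) (d : Int) : Prop :=
  (1 ≤ n ∧ 1 ≤ m ∧ n ≤ (mine.length : Int) ∧
    ∀ i, i < n.toNat → m ≤ ((mine.getD i []).length : Int)) ∨
  (n ≤ 0 ∧ m ≤ 0) ∨
  (n ≤ 0 ∧ 1 ≤ m ∧ 1 ≤ (mine.length : Int) ∧ m ≤ ((mine.getD 0 []).length : Int) ∧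
    ∀ c, c < m.toNat → ¬((mine.getD 0 []).getD c 0 ≤ d)) ∨
  (1 ≤ n ∧ m ≤ 0 ∧ ∀ i, i < n.toNat → 1 ≤ i →
    ((i : Int) < (mine.length : Int) ∧ 1 - m ≤ ((mine.getD i []).length : Int) ∧
     ¬((mine.getD i []).getD 0 0 ≤ d) ∧
     ¬((mine.getD i []).getD ((((mine.getD i []).length : Int) + m - 1).toNat) 0 ≤ d)))
instance (mine : List (List Int)) (n : Int) (m : Int) (k : Int) (d : Int) :
    Decidable (Pre_mining mine n m k d) := by unfold Pre_mining; infer_instance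

def pvWitness_mining : List (List Int) × Int × Int × Int × Int := ([[0]], 1, 1, 1, 0)

-- On single-column inputs (m = 1) with s0 + s' < k ≤ s0 + 2*s' (s0 = 1 if mine[0][0] ≤ d else 0,
-- s' = number of rows 1..n-1 with mine[r][0] ≤ d), A seeds every shallow cell of rows 1..n-1
-- twice (column 0 and column m-1 coincide, and the seeding loops never check visited) and returns
-- True from the inflated total, while B counts each distinct cell once and returns False, the
-- intended answer.
def D_mining (mine : List (List Int)) (n : Int) (m : Int) (k : Int) (d : Int) : Prop :=
  m = 1 ∧ 1 ≤ n ∧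
  ((if (mine.getD 0 []).getD 0 0 ≤ d then (1 : Int) else 0) +
      (((List.range' 1 (n.toNat - 1)).countP (fun i => decide ((mine.getD i []).getD 0 0 ≤ d))) : Nat) < k ∧
   k ≤ (if (mine.getD 0 []).getD 0 0 ≤ d then (1 : Int) else 0) +
      2 * (((List.range' 1 (n.toNat - 1)).countP (fun i => decide ((mine.getD i []).getD 0 0 ≤ d))) : Nat))
instance (mine : List (List Int)) (n : Int) (m : Int) (k : Int) (d : Int) :
    Decidable (D_mining mine n m k d) := by unfold D_mining; infer_instance

def Spec_mining (mine : List (List Int)) (n : Int) (m : Int) (k : Int) (d : Int) (out : Bool) : Prop :=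
  ¬ D_mining mine n m k d → out = mining_alt mine n m k d
instance (mine : List (List Int)) (n : Int) (m : Int) (k : Int) (d : Int) (out : Bool) :
    Decidable (Spec_mining mine n m k d out) := by unfold Spec_mining; infer_instance

def pvDiffWitness_mining : List (List Int) × Int × Int × Int × Int := ([[0], [0]], 2, 1, 3, 0)
def pvDiffWitnessOut_mining : Bool × Bool := (true, false)

-- ===== CLAIM (what is proved, stated in full; the proofs are below) =====
def Claim_unchanged_mining : Prop := ∀ (mine : List (List Int)) (n : Int) (m : Int) (k : Int) (d : Int), Dom_mining mine n m k d → Pre_mining mine n m k d → Spec_mining mine n m k d (mining mine n m k d)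
def Claim_changed_mining : Prop := Dom_mining (pvDiffWitness_mining.1) (pvDiffWitness_mining.2.1) (pvDiffWitness_mining.2.2.1) (pvDiffWitness_mining.2.2.2.1) (pvDiffWitness_mining.2.2.2.2) ∧ Pre_mining (pvDiffWitness_mining.1) (pvDiffWitness_mining.2.1) (pvDiffWitness_mining.2.2.1) (pvDiffWitness_mining.2.2.2.1) (pvDiffWitness_mining.2.2.2.2) ∧ D_mining (pvDiffWitness_mining.1) (pvDiffWitness_mining.2.1) (pvDiffWitness_mining.2.2.1) (pvDiffWitness_mining.2.2.2.1) (pvDiffWitness_mining.2.2.2.2) ∧ mining (pvDiffWitness_mining.1) (pvDiffWitness_mining.2.1) (pvDiffWitness_mining.2.2.1) (pvDiffWitness_mining.2.2.2.1) (pvDiffWitness_mining.2.2.2.2) = pvDiffWitnessOut_mining.1 ∧ mining_alt (pvDiffWitness_mining.1) (pvDiffWitness_mining.2.1) (pvDiffWitness_mining.2.2.1) (pvDiffWitness_mining.2.2.2.1) (pvDiffWitness_mining.2.2.2.2) = pvDiffWitnessOut_mining.2 ∧ pvDiffWitnessOut_mining.1 ≠ pvDiffWitnessOut_mining.2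
def Claim_exact_mining : Prop := ∀ (mine : List (List Int)) (n : Int) (m : Int) (k : Int) (d : Int), Dom_mining mine n m k d → Pre_mining mine n m k d → D_mining mine n m k d → mining mine n m k d ≠ mining_alt mine n m k d

-- ===== LEMMAS AND PROOFS =====

-- proof-side predicates
def ShapeG (N M : Nat) (v : List (List Bool)) : Prop :=
  v.length = N ∧ ∀ row ∈ v, row.length = M
def SubG (v w : List (List Bool)) : Prop :=
  ∀ r c, g2 v r c = true → g2 w r c = true
def AdjG (r c a b : Nat) : Prop :=
  (a = r + 1 ∧ b = c) ∨ (r = a + 1 ∧ b = c) ∨ (a = r ∧ b = c + 1) ∨ (a = r ∧ c = b + 1)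
def ClosedG (mine : List (List Int)) (d : Int) (N M : Nat) (v : List (List Bool)) : Prop :=
  ∀ r c a b, r < N → c < M → a < N → b < M → AdjG r c a b →
    g2 v r c = true → cellD mine a b ≤ d → g2 v a b = true

theorem subG_refl (v : List (List Bool)) : SubG v v := fun _ _ h => h
theorem subG_trans {u v w : List (List Bool)} (h1 : SubG u v) (h2 : SubG v w) : SubG u w :=
  fun r c h => h2 r c (h1 r c h)

-- 1D lemmas
theorem set_getD_self (l : List Bool) (c : Nat) : (l.set c true).getD c true = true := by
  induction l generalizing c with
  | nil => simp
  | cons b t ih =>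
    cases c with
    | zero => simp
    | succ c => simpa using ih c

theorem getD_set_ne (l : List Bool) (c c' : Nat) (h : c ≠ c') (x : Bool) :
    (l.set c x).getD c' true = l.getD c' true := by
  induction l generalizing c c' with
  | nil => simp
  | cons b t ih =>
    cases c with
    | zero => cases c' with
      | zero => omega
      | succ c' => simp
    | succ c => cases c' with
      | zero => simp
      | succ c' => simpa using ih c c' (by omega) 

theorem count_set_false (l : List Bool) (c : Nat) (h : l.getD c true = false) :
    (l.set c true).count true = l.count true + 1 ∧ (l.set c true).count false + 1 = l.count false := by
  induction l generalizing c with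
  | nil => simp at h
  | cons b t ih =>
    cases c with
    | zero =>
      simp only [List.getD_cons_zero] at h
      subst h
      simp [List.count_cons]
    | succ c =>
      simp only [List.getD_cons_succ] at h
      have := ih c h
      constructor
      · simp only [List.set_cons_succ, List.count_cons, this.1]; omega
      · simp only [List.set_cons_succ, List.count_cons, ← this.2]; omega

theorem count_set_true (l : List Bool) (c : Nat) (h : l.getD c true = true) :
    (l.set c true).count true = l.count true ∧ (l.set c true).count false = l.count false := by
  induction l generalizing c with
  | nil => simp
  | cons b t ih =>
    cases c with
    | zero =>
      simp only [List.getD_cons_zero] at h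
      subst h
      simp [List.count_cons]
    | succ c =>
      simp only [List.getD_cons_succ] at h
      have := ih c h
      constructor
      · simp only [List.set_cons_succ, List.count_cons, this.1]
      · simp only [List.set_cons_succ, List.count_cons, this.2]

-- 2D pointwise lemmas
theorem g2_nil (r c : Nat) : g2 [] r c = true := by
  simp [g2]

theorem g2_cons_zero (row : List Bool) (rest : List (List Bool)) (c : Nat) :
    g2 (row :: rest) 0 c = row.getD c true := by simp [g2]

theorem g2_cons_succ (row : List Bool) (rest : List (List Bool)) (r c : Nat) :
    g2 (row :: rest) (r + 1) c = g2 rest r c := by simp [g2]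

theorem s2_cons_zero (row : List Bool) (rest : List (List Bool)) (c : Nat) :
    s2 (row :: rest) 0 c = (row.set c true) :: rest := by simp [s2]

theorem s2_cons_succ (row : List Bool) (rest : List (List Bool)) (r c : Nat) :
    s2 (row :: rest) (r + 1) c = row :: s2 rest r c := by simp [s2]

theorem g2_s2_self (v : List (List Bool)) (r c : Nat) : g2 (s2 v r c) r c = true := by
  induction v generalizing r with
  | nil => simp [s2, g2]
  | cons row rest ih =>
    cases r with
    | zero => rw [s2_cons_zero, g2_cons_zero]; exact set_getD_self row c
    | succ r => rw [s2_cons_succ, g2_cons_succ]; exact ih r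

theorem g2_s2_ne (v : List (List Bool)) (r c a b : Nat) (h : ¬(r = a ∧ c = b)) :
    g2 (s2 v r c) a b = g2 v a b := by
  induction v generalizing r a with
  | nil => simp [s2]
  | cons row rest ih =>
    cases r with
    | zero =>
      cases a with
      | zero =>
        have hcb : c ≠ b := by tauto
        rw [s2_cons_zero, g2_cons_zero, g2_cons_zero]
        exact getD_set_ne row c b hcb true
      | succ a => rw [s2_cons_zero, g2_cons_succ, g2_cons_succ]
    | succ r =>
      cases a with
      | zero => rw [s2_cons_succ, g2_cons_zero, g2_cons_zero]
      | succ a =>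
        rw [s2_cons_succ, g2_cons_succ, g2_cons_succ]
        exact ih r a (by tauto)

theorem sub_s2 (v : List (List Bool)) (r c : Nat) : SubG v (s2 v r c) := by
  intro a b h
  by_cases hab : r = a ∧ c = b
  · obtain ⟨h1, h2⟩ := hab; subst h1; subst h2; exact g2_s2_self v r c
  · rw [g2_s2_ne v r c a b hab]; exact h

theorem sub_s2_into (u w : List (List Bool)) (r c : Nat) (hsub : SubG u w)
    (h : g2 w r c = true) : SubG (s2 u r c) w := by
  intro a b hg
  by_cases hab : r = a ∧ c = b
  · obtain ⟨h1, h2⟩ := hab; subst h1; subst h2; exact h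
  · rw [g2_s2_ne u r c a b hab] at hg; exact hsub a b hg

theorem shape_s2 (N M : Nat) (v : List (List Bool)) (r c : Nat) (h : ShapeG N M v) :
    ShapeG N M (s2 v r c) := by
  obtain ⟨hl, hr⟩ := h
  constructor
  · rw [s2, List.length_set]; exact hl
  · intro row hrow
    by_cases hlt : r < v.length
    · rcases List.mem_or_eq_of_mem_set hrow with h1 | h1
      · exact hr row h1
      · subst h1
        rw [List.length_set]
        have : v.getD r [] ∈ v := by
          rw [List.getD]
          have : v[r]? = some v[r] := List.getElem?_eq_getElem hlt
          rw [this]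
          exact List.getElem_mem hlt
        exact hr _ this
    · rw [s2, List.set_eq_of_length_le (by omega)] at hrow
      exact hr row hrow

theorem cnt2_s2_false (v : List (List Bool)) (r c : Nat) (h : g2 v r c = false) :
    cnt2 (s2 v r c) = cnt2 v + 1 := by
  induction v generalizing r with
  | nil => rw [g2_nil] at h; cases h
  | cons row rest ih =>
    cases r with
    | zero =>
      have h' : row.getD c true = false := by rwa [g2_cons_zero] at h
      rw [s2_cons_zero]
      simp only [cnt2, List.map_cons, List.sum_cons, (count_set_false row c h').1]
      omega
    | succ r =>
      have h' : g2 rest r c = false := by rwa [g2_cons_succ] at h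
      rw [s2_cons_succ]
      simp only [cnt2, List.map_cons, List.sum_cons]
      have := ih r h'
      simp only [cnt2] at this
      omega

theorem cnt2_s2_true (v : List (List Bool)) (r c : Nat) (h : g2 v r c = true) :
    cnt2 (s2 v r c) = cnt2 v := by
  induction v generalizing r with
  | nil => simp [s2]
  | cons row rest ih =>
    cases r with
    | zero =>
      have h' : row.getD c true = true := by rwa [g2_cons_zero] at h
      rw [s2_cons_zero]
      simp only [cnt2, List.map_cons, List.sum_cons, (count_set_true row c h').1]
    | succ r =>
      have h' : g2 rest r c = true := by rwa [g2_cons_succ] at h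
      rw [s2_cons_succ]
      simp only [cnt2, List.map_cons, List.sum_cons]
      have := ih r h'
      simp only [cnt2] at this
      omega

theorem cf2_s2_false (v : List (List Bool)) (r c : Nat) (h : g2 v r c = false) :
    cf2 (s2 v r c) + 1 = cf2 v := by
  induction v generalizing r with
  | nil => rw [g2_nil] at h; cases h
  | cons row rest ih =>
    cases r with
    | zero =>
      have h' : row.getD c true = false := by rwa [g2_cons_zero] at h
      rw [s2_cons_zero]
      simp only [cf2, List.map_cons, List.sum_cons]
      have := (count_set_false row c h').2
      omega
    | succ r =>
      have h' : g2 rest r c = false := by rwa [g2_cons_succ] at h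
      rw [s2_cons_succ]
      simp only [cf2, List.map_cons, List.sum_cons]
      have := ih r h'
      simp only [cf2] at this
      omega

-- grid extensionality
theorem list_ext_getD (l1 l2 : List Bool) (hl : l1.length = l2.length)
    (h : ∀ c, l1.getD c true = l2.getD c true) : l1 = l2 := by
  induction l1 generalizing l2 with
  | nil => cases l2 with
    | nil => rfl
    | cons b t => simp at hl
  | cons b t ih =>
    cases l2 with
    | nil => simp at hl
    | cons b' t' =>
      have hb := h 0
      simp only [List.getD_cons_zero] at hb
      subst hb
      have := ih t' (by simpa using hl) (fun c => by simpa using h (c + 1))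
      rw [this]

theorem grid_ext (N M : Nat) (v w : List (List Bool)) (hv : ShapeG N M v) (hw : ShapeG N M w)
    (h : ∀ r c, g2 v r c = g2 w r c) : v = w := by
  induction v generalizing w N with
  | nil =>
    cases w with
    | nil => rfl
    | cons row rest =>
      exfalso
      have h1 : (0 : Nat) = N := by simpa using hv.1
      have h2 := hw.1
      simp [← h1] at h2
  | cons row rest ih =>
    cases w with
    | nil =>
      exfalso
      have h1 : (0 : Nat) = N := by simpa using hw.1
      have h2 := hv.1
      simp [← h1] at h2
    | cons row' rest' =>
      have hrow : row = row' := by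
        refine list_ext_getD row row' ?_ (fun c => by
          have := h 0 c
          rwa [g2_cons_zero, g2_cons_zero] at this)
        rw [hv.2 row (by simp), hw.2 row' (by simp)]
      subst hrow
      have hN : rest.length + 1 = N := by simpa using hv.1
      have hN' : rest'.length + 1 = N := by simpa using hw.1
      have htail := ih rest.length rest'
        ⟨rfl, fun r hr => hv.2 r (by simp [hr])⟩
        ⟨by omega, fun r hr => hw.2 r (by simp [hr])⟩
        (fun r c => by
          have := h (r + 1) c
          rwa [g2_cons_succ, g2_cons_succ] at this)
      rw [htail]

-- replicate grid
theorem shape_replicate (N M : Nat) :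
    ShapeG N M (List.replicate N (List.replicate M false)) := by
  constructor
  · simp
  · intro row hrow
    rw [List.eq_of_mem_replicate hrow]
    simp

theorem getD_replicate_false (M c : Nat) (hc : c < M) :
    (List.replicate M false).getD c true = false := by
  induction M generalizing c with
  | zero => omega
  | succ mm ihm =>
    rw [List.replicate_succ]
    cases c with
    | zero => simp
    | succ c => simpa using ihm c (by omega)

theorem g2_replicate (N M r c : Nat) (hr : r < N) (hc : c < M) :
    g2 (List.replicate N (List.replicate M false)) r c = false := by
  induction N generalizing r with
  | zero => omega
  | succ n ih =>
    rw [List.replicate_succ]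
    cases r with
    | zero => rw [g2_cons_zero]; exact getD_replicate_false M c hc
    | succ r => rw [g2_cons_succ]; exact ih r (by omega)

theorem cnt2_replicate (N M : Nat) :
    cnt2 (List.replicate N (List.replicate M false)) = 0 := by
  induction N with
  | zero => simp [cnt2]
  | succ n ih =>
    rw [List.replicate_succ]
    simp only [cnt2, List.map_cons, List.sum_cons]
    simp only [cnt2] at ih
    rw [ih]
    simp [List.count_replicate]

theorem mem_cellsB (N M : Nat) (p : Nat × Nat) :
    p ∈ cellsB N M ↔ p.1 < N ∧ p.2 < M := by
  cases p with
  | mk r c =>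
    constructor
    · intro hmem
      rw [cellsB, List.mem_flatMap] at hmem
      obtain ⟨a, ha, hb⟩ := hmem
      rw [List.mem_map] at hb
      obtain ⟨b, hb2, hb3⟩ := hb
      obtain ⟨h1, h2⟩ := Prod.mk.injEq .. ▸ hb3
      simp only [List.mem_range] at ha hb2
      constructor <;> simp_all
    · rintro ⟨h1, h2⟩
      rw [cellsB, List.mem_flatMap]
      exact ⟨r, by simpa using h1, by rw [List.mem_map]; exact ⟨c, by simpa using h2, rfl⟩⟩


-- sweep lemmas
theorem satLoop_succ (mine : List (List Int)) (N M : Nat) (d : Int) (f : Nat) (v : List (List Bool)) :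
    satLoop mine N M d (f + 1) v =
      if (sweepB mine N M d v).2 then satLoop mine N M d f (sweepB mine N M d v).1
      else (sweepB mine N M d v).1 := rfl

theorem sweepStep_flag (mine : List (List Int)) (N M : Nat) (d : Int)
    (st : List (List Bool) × Bool) (p : Nat × Nat) (h : st.2 = true) :
    (sweepStep mine N M d st p).2 = true := by
  rw [sweepStep]
  split
  · split
    · rfl
    · exact h
  · exact h

theorem sweepFold_flag (mine : List (List Int)) (N M : Nat) (d : Int) :
    ∀ (l : List (Nat × Nat)) (st : List (List Bool) × Bool), st.2 = true →
      (l.foldl (sweepStep mine N M d) st).2 = true := by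
  intro l
  induction l with
  | nil => intro st h; exact h
  | cons p l ih =>
    intro st h
    exact ih _ (sweepStep_flag mine N M d st p h)

theorem sweepFold_basic (mine : List (List Int)) (N M : Nat) (d : Int) (v : List (List Bool)) :
    ∀ (l : List (Nat × Nat)) (st : List (List Bool) × Bool),
      ShapeG N M st.1 → SubG v st.1 → (st.2 = false → st.1 = v) → (st.2 = true → cf2 st.1 < cf2 v) →
      ShapeG N M (l.foldl (sweepStep mine N M d) st).1 ∧
      SubG v (l.foldl (sweepStep mine N M d) st).1 ∧
      ((l.foldl (sweepStep mine N M d) st).2 = false → (l.foldl (sweepStep mine N M d) st).1 = v) ∧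
      ((l.foldl (sweepStep mine N M d) st).2 = true → cf2 (l.foldl (sweepStep mine N M d) st).1 < cf2 v) := by
  intro l
  induction l with
  | nil => intro st h1 h2 h3 h4; exact ⟨h1, h2, h3, h4⟩
  | cons p l ih =>
    intro st h1 h2 h3 h4
    rw [List.foldl_cons]
    refine ih (sweepStep mine N M d st p) ?_ ?_ ?_ ?_ <;> rw [sweepStep]
    · split
      · split
        · exact shape_s2 N M st.1 p.1 p.2 h1
        · exact h1
      · exact h1
    · split
      · split
        · exact subG_trans h2 (sub_s2 st.1 p.1 p.2)
        · exact h2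
      · exact h2
    · split
      · split
        · intro h; cases h
        · exact h3
      · exact h3
    · split
      · rename_i hg
        split
        · intro _
          have hcf := cf2_s2_false st.1 p.1 p.2 hg.1
          have hle : cf2 st.1 ≤ cf2 v := by
            cases hst : st.2
            · rw [h3 hst]
            · exact Nat.le_of_lt (h4 hst)
          simp only []
          omega
        · exact h4
      · exact h4

theorem sweepFold_cnt (mine : List (List Int)) (N M : Nat) (d : Int) :
    ∀ (l : List (Nat × Nat)) (st : List (List Bool) × Bool),
      cnt2 st.1 ≤ cnt2 (l.foldl (sweepStep mine N M d) st).1 := by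
  intro l
  induction l with
  | nil => intro st; exact Nat.le_refl _
  | cons p l ih =>
    intro st
    refine Nat.le_trans ?_ (ih (sweepStep mine N M d st p))
    rw [sweepStep]
    split
    · rename_i hg
      split
      · rw [cnt2_s2_false st.1 p.1 p.2 hg.1]; omega
      · exact Nat.le_refl _
    · exact Nat.le_refl _

theorem sweepFold_ub (mine : List (List Int)) (N M : Nat) (d : Int) (w : List (List Bool))
    (hcl : ClosedG mine d N M w) :
    ∀ (l : List (Nat × Nat)), (∀ p ∈ l, p.1 < N ∧ p.2 < M) →
      ∀ (st : List (List Bool) × Bool), SubG st.1 w →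
      SubG (l.foldl (sweepStep mine N M d) st).1 w := by
  intro l
  induction l with
  | nil => intro _ st hsub; exact hsub
  | cons p l ih =>
    intro hmem st hsub
    have hp := hmem p (by simp)
    rw [List.foldl_cons]
    refine ih (fun q hq => hmem q (by simp [hq])) _ ?_
    rw [sweepStep]
    split
    · rename_i hg
      split
      · rename_i hnb
        refine sub_s2_into st.1 w p.1 p.2 hsub ?_
        rcases hnb with ⟨h0, hm⟩ | ⟨h0, hm⟩ | ⟨h0, hm⟩ | ⟨h0, hm⟩
        · exact hcl (p.1 - 1) p.2 p.1 p.2 (by omega) hp.2 hp.1 hp.2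
            (Or.inl ⟨by omega, rfl⟩) (hsub _ _ hm) hg.2
        · exact hcl (p.1 + 1) p.2 p.1 p.2 h0 hp.2 hp.1 hp.2
            (Or.inr (Or.inl ⟨rfl, rfl⟩)) (hsub _ _ hm) hg.2
        · exact hcl p.1 (p.2 - 1) p.1 p.2 hp.1 (by omega) hp.1 hp.2
            (Or.inr (Or.inr (Or.inl ⟨rfl, by omega⟩))) (hsub _ _ hm) hg.2
        · exact hcl p.1 (p.2 + 1) p.1 p.2 hp.1 h0 hp.1 hp.2
            (Or.inr (Or.inr (Or.inr ⟨rfl, rfl⟩))) (hsub _ _ hm) hg.2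
      · exact hsub
    · exact hsub

theorem sweep_false_closed (mine : List (List Int)) (N M : Nat) (d : Int) (v : List (List Bool))
    (hsh : ShapeG N M v) (h : (sweepB mine N M d v).2 = false) :
    ClosedG mine d N M v := by
  intro r c a b hr hc ha hb hadj hm hsl
  by_contra hnm
  have hnm' : g2 v a b = false := by
    cases hg : g2 v a b
    · rfl
    · exact absurd hg hnm
  obtain ⟨l1, l2, hsplit⟩ := List.append_of_mem ((mem_cellsB N M (a, b)).2 ⟨ha, hb⟩)
  rw [sweepB, hsplit, List.foldl_append] at h
  have hb1 := sweepFold_basic mine N M d v l1 (v, false) hsh (subG_refl v)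
    (fun _ => rfl) (fun hh => by cases hh)
  cases hf1 : (l1.foldl (sweepStep mine N M d) (v, false)).2 with
  | true =>
    rw [List.foldl_cons] at h
    rw [sweepFold_flag mine N M d l2 _ (sweepStep_flag mine N M d _ _ hf1)] at h
    cases h
  | false =>
    have hv1 : (l1.foldl (sweepStep mine N M d) (v, false)).1 = v := hb1.2.2.1 hf1
    rw [List.foldl_cons] at h
    have hstep : (sweepStep mine N M d (l1.foldl (sweepStep mine N M d) (v, false)) (a, b)).2 = true := by
      rw [sweepStep]
      have hguard : g2 (l1.foldl (sweepStep mine N M d) (v, false)).1 a b = false ∧ cellD mine a b ≤ d := by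
        constructor
        · rw [hv1]; exact hnm'
        · exact hsl
      have hnb : (0 < (a, b).1 ∧ g2 (l1.foldl (sweepStep mine N M d) (v, false)).1 ((a, b).1 - 1) (a, b).2 = true) ∨
          ((a, b).1 + 1 < N ∧ g2 (l1.foldl (sweepStep mine N M d) (v, false)).1 ((a, b).1 + 1) (a, b).2 = true) ∨
          (0 < (a, b).2 ∧ g2 (l1.foldl (sweepStep mine N M d) (v, false)).1 (a, b).1 ((a, b).2 - 1) = true) ∨
          ((a, b).2 + 1 < M ∧ g2 (l1.foldl (sweepStep mine N M d) (v, false)).1 (a, b).1 ((a, b).2 + 1) = true) := by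
        rcases hadj with ⟨e1, e2⟩ | ⟨e1, e2⟩ | ⟨e1, e2⟩ | ⟨e1, e2⟩
        · refine Or.inl ⟨by omega, ?_⟩
          show g2 _ (a - 1) b = true
          rw [hv1]
          have : a - 1 = r := by omega
          rw [this, e2]; exact hm
        · refine Or.inr (Or.inl ⟨by omega, ?_⟩)
          show g2 _ (a + 1) b = true
          rw [hv1]
          have : a + 1 = r := by omega
          rw [this, e2]; exact hm
        · refine Or.inr (Or.inr (Or.inl ⟨by omega, ?_⟩))
          show g2 _ a (b - 1) = true
          rw [hv1]
          have : b - 1 = c := by omega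
          rw [this, e1]; exact hm
        · refine Or.inr (Or.inr (Or.inr ⟨by omega, ?_⟩))
          show g2 _ a (b + 1) = true
          rw [hv1]
          have : b + 1 = c := by omega
          rw [this, e1]; exact hm
      rw [if_pos hguard, if_pos hnb]
    rw [sweepFold_flag mine N M d l2 _ hstep] at h
    cases h

theorem closed_sweep_id (mine : List (List Int)) (N M : Nat) (d : Int) (v : List (List Bool))
    (hcl : ClosedG mine d N M v) : sweepB mine N M d v = (v, false) := by
  rw [sweepB]
  have : ∀ (l : List (Nat × Nat)), (∀ p ∈ l, p.1 < N ∧ p.2 < M) →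
      l.foldl (sweepStep mine N M d) (v, false) = (v, false) := by
    intro l
    induction l with
    | nil => intro _; rfl
    | cons p l ih =>
      intro hmem
      have hp := hmem p (by simp)
      rw [List.foldl_cons]
      have hstep : sweepStep mine N M d (v, false) p = (v, false) := by
        rw [sweepStep]
        split
        · rename_i hg
          rw [if_neg ?_]
          rintro (⟨h0, hm⟩ | ⟨h0, hm⟩ | ⟨h0, hm⟩ | ⟨h0, hm⟩)
          · have := hcl (p.1 - 1) p.2 p.1 p.2 (by omega) hp.2 hp.1 hp.2
              (Or.inl ⟨by omega, rfl⟩) hm hg.2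
            rw [this] at hg; cases hg.1
          · have := hcl (p.1 + 1) p.2 p.1 p.2 h0 hp.2 hp.1 hp.2
              (Or.inr (Or.inl ⟨rfl, rfl⟩)) hm hg.2
            rw [this] at hg; cases hg.1
          · have := hcl p.1 (p.2 - 1) p.1 p.2 hp.1 (by omega) hp.1 hp.2
              (Or.inr (Or.inr (Or.inl ⟨rfl, by omega⟩))) hm hg.2
            rw [this] at hg; cases hg.1
          · have := hcl p.1 (p.2 + 1) p.1 p.2 hp.1 h0 hp.1 hp.2
              (Or.inr (Or.inr (Or.inr ⟨rfl, rfl⟩))) hm hg.2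
            rw [this] at hg; cases hg.1
        · rfl
      rw [hstep]
      exact ih (fun q hq => hmem q (by simp [hq]))
  exact this (cellsB N M) (fun p hp => (mem_cellsB N M p).1 hp)

-- saturation lemmas
theorem satLoop_props (mine : List (List Int)) (N M : Nat) (d : Int) :
    ∀ (f : Nat) (v : List (List Bool)), ShapeG N M v → cf2 v < f →
      ShapeG N M (satLoop mine N M d f v) ∧ SubG v (satLoop mine N M d f v) ∧
      ClosedG mine d N M (satLoop mine N M d f v) := by
  intro f
  induction f with
  | zero => intro v _ h; omega
  | succ f ih =>
    intro v hsh hf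
    have hb := sweepFold_basic mine N M d v (cellsB N M) (v, false) hsh (subG_refl v)
      (fun _ => rfl) (fun hh => by cases hh)
    rw [satLoop_succ]
    cases hflag : (sweepB mine N M d v).2 with
    | true =>
      rw [if_pos rfl]
      have hcf : cf2 (sweepB mine N M d v).1 < cf2 v := hb.2.2.2 hflag
      have := ih (sweepB mine N M d v).1 hb.1 (by omega)
      exact ⟨this.1, subG_trans hb.2.1 this.2.1, this.2.2⟩
    | false =>
      rw [if_neg (by simp [hflag])]
      have hv1 : (sweepB mine N M d v).1 = v := hb.2.2.1 hflag
      rw [hv1]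
      exact ⟨hsh, subG_refl v, sweep_false_closed mine N M d v hsh hflag⟩

theorem satLoop_least (mine : List (List Int)) (N M : Nat) (d : Int) (w : List (List Bool))
    (hcl : ClosedG mine d N M w) :
    ∀ (f : Nat) (v : List (List Bool)), SubG v w → SubG (satLoop mine N M d f v) w := by
  intro f
  induction f with
  | zero => intro v hsub; exact hsub
  | succ f ih =>
    intro v hsub
    have hub := sweepFold_ub mine N M d w hcl (cellsB N M)
      (fun p hp => (mem_cellsB N M p).1 hp) (v, false) hsub
    rw [satLoop_succ]
    split
    · exact ih _ hub
    · exact hub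

theorem satLoop_cnt (mine : List (List Int)) (N M : Nat) (d : Int) :
    ∀ (f : Nat) (v : List (List Bool)), cnt2 v ≤ cnt2 (satLoop mine N M d f v) := by
  intro f
  induction f with
  | zero => intro v; exact Nat.le_refl _
  | succ f ih =>
    intro v
    have h1 : cnt2 v ≤ cnt2 (sweepB mine N M d v).1 := sweepFold_cnt mine N M d (cellsB N M) (v, false)
    rw [satLoop_succ]
    split
    · exact Nat.le_trans h1 (ih _)
    · exact h1

theorem sat_invariant (mine : List (List Int)) (N M : Nat) (d : Int) (v v' : List (List Bool))
    (hsh : ShapeG N M v) (hsh' : ShapeG N M v') (hsub : SubG v v')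
    (hsub' : SubG v' (satLoop mine N M d (cf2 v + 1) v)) :
    satLoop mine N M d (cf2 v' + 1) v' = satLoop mine N M d (cf2 v + 1) v := by
  obtain ⟨hshX, hsubX, hclX⟩ := satLoop_props mine N M d (cf2 v + 1) v hsh (by omega)
  obtain ⟨hshY, hsubY, hclY⟩ := satLoop_props mine N M d (cf2 v' + 1) v' hsh' (by omega)
  have d1 : SubG (satLoop mine N M d (cf2 v' + 1) v') (satLoop mine N M d (cf2 v + 1) v) :=
    satLoop_least mine N M d _ hclX _ v' hsub'
  have d2 : SubG (satLoop mine N M d (cf2 v + 1) v) (satLoop mine N M d (cf2 v' + 1) v') :=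
    satLoop_least mine N M d _ hclY _ v (subG_trans hsub hsubY)
  refine grid_ext N M _ _ hshY hshX ?_
  intro r c
  cases h1 : g2 (satLoop mine N M d (cf2 v' + 1) v') r c with
  | true => rw [d1 r c h1]
  | false =>
    cases h2 : g2 (satLoop mine N M d (cf2 v + 1) v) r c with
    | false => rfl
    | true =>
      have := d2 r c h2
      rw [this] at h1
      cases h1


-- BFS side
def SatOf (mine : List (List Int)) (N M : Nat) (d : Int) (v : List (List Bool)) : List (List Bool) :=
  satLoop mine N M d (cf2 v + 1) v

def BfsMid (mine : List (List Int)) (d : Int) (N M : Nat) (v : List (List Bool))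
    (qs : List (Nat × Nat)) (t : Int) (S : List (List Bool))
    (st : List (Nat × Nat) × List (List Bool) × Int) : Prop :=
  ShapeG N M st.2.1 ∧ SubG v st.2.1 ∧ SubG st.2.1 S ∧
  (∀ p ∈ st.1, g2 st.2.1 p.1 p.2 = true ∧ p.1 < N ∧ p.2 < M) ∧
  (∀ p ∈ qs, p ∈ st.1) ∧
  (∀ a b, g2 st.2.1 a b = true → g2 v a b = true ∨ (a, b) ∈ st.1) ∧
  (st.2.2 - (cnt2 st.2.1 : Int) = t - (cnt2 v : Int)) ∧
  (2 * cf2 st.2.1 + st.1.length ≤ 2 * cf2 v + qs.length)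

theorem bfsStep_eq (mine : List (List Int)) (N M : Nat) (d : Int) (r c : Nat)
    (st : List (Nat × Nat) × List (List Bool) × Int) (dx dy : Int) :
    bfsStep mine N M d r c st (dx, dy) =
      if 0 ≤ (r : Int) + dx ∧ (r : Int) + dx < (N : Int) ∧ 0 ≤ (c : Int) + dy ∧ (c : Int) + dy < (M : Int) then
        if cellD mine ((r : Int) + dx).toNat ((c : Int) + dy).toNat ≤ d ∧
            g2 st.2.1 ((r : Int) + dx).toNat ((c : Int) + dy).toNat = false then
          (st.1 ++ [(((r : Int) + dx).toNat, ((c : Int) + dy).toNat)],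
            s2 st.2.1 ((r : Int) + dx).toNat ((c : Int) + dy).toNat, st.2.2 + 1)
        else st
      else st := rfl

theorem bfsStep_mid (mine : List (List Int)) (N M : Nat) (d : Int) (r c : Nat)
    (v : List (List Bool)) (qs : List (Nat × Nat)) (t : Int) (S : List (List Bool))
    (hr : r < N) (hc : c < M) (hS : ClosedG mine d N M S) (hmS : g2 S r c = true)
    (dxy : Int × Int) (hd : dxy ∈ dirsA)
    (st : List (Nat × Nat) × List (List Bool) × Int)
    (hst : BfsMid mine d N M v qs t S st) :
    BfsMid mine d N M v qs t S (bfsStep mine N M d r c st dxy) := by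
  obtain ⟨dx, dy⟩ := dxy
  obtain ⟨h1, h2, h3, h4, h5, h6, h7, h8⟩ := hst
  rw [bfsStep_eq]
  split
  · rename_i hg
    split
    · rename_i hcell
      have ha : ((r : Int) + dx).toNat < N := by omega
      have hb : ((c : Int) + dy).toNat < M := by omega
      have hadj : AdjG r c (((r : Int) + dx).toNat) (((c : Int) + dy).toNat) := by
        simp only [dirsA, List.mem_cons, List.not_mem_nil, or_false] at hd
        rcases hd with h | h | h | h <;>
          (injection h with hdx hdy; subst hdx; subst hdy; unfold AdjG)
        · exact Or.inr (Or.inl ⟨by omega, by omega⟩)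
        · exact Or.inl ⟨by omega, by omega⟩
        · exact Or.inr (Or.inr (Or.inr ⟨by omega, by omega⟩))
        · exact Or.inr (Or.inr (Or.inl ⟨by omega, by omega⟩))
      have hSnew : g2 S (((r : Int) + dx).toNat) (((c : Int) + dy).toNat) = true :=
        hS r c _ _ hr hc ha hb hadj hmS hcell.1
      refine ⟨shape_s2 N M st.2.1 _ _ h1, subG_trans h2 (sub_s2 st.2.1 _ _),
          sub_s2_into st.2.1 S _ _ h3 hSnew, ?_, ?_, ?_, ?_, ?_⟩
      · intro p hp
        rcases List.mem_append.1 hp with hp | hp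
        · obtain ⟨hpg, hp1, hp2⟩ := h4 p hp
          exact ⟨sub_s2 st.2.1 _ _ p.1 p.2 hpg, hp1, hp2⟩
        · simp only [List.mem_singleton] at hp
          subst hp
          exact ⟨g2_s2_self st.2.1 _ _, ha, hb⟩
      · intro p hp
        exact List.mem_append_left _ (h5 p hp)
      · intro a b hg2
        by_cases hab : ((r : Int) + dx).toNat = a ∧ ((c : Int) + dy).toNat = b
        · obtain ⟨e1, e2⟩ := hab
          subst e1; subst e2
          exact Or.inr (List.mem_append_right _ (by simp))
        · rw [g2_s2_ne st.2.1 _ _ a b hab] at hg2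
          rcases h6 a b hg2 with h | h
          · exact Or.inl h
          · exact Or.inr (List.mem_append_left _ h)
      · have := cnt2_s2_false st.2.1 _ _ hcell.2
        simp only [this]
        push_cast
        omega
      · have := cf2_s2_false st.2.1 _ _ hcell.2
        simp only [List.length_append, List.length_singleton]
        omega
    · exact ⟨h1, h2, h3, h4, h5, h6, h7, h8⟩
  · exact ⟨h1, h2, h3, h4, h5, h6, h7, h8⟩

theorem bfsStep_sub (mine : List (List Int)) (N M : Nat) (d : Int) (r c : Nat)
    (st : List (Nat × Nat) × List (List Bool) × Int) (dxy : Int × Int) :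
    SubG st.2.1 (bfsStep mine N M d r c st dxy).2.1 := by
  obtain ⟨dx, dy⟩ := dxy
  rw [bfsStep_eq]
  split
  · split
    · exact sub_s2 st.2.1 _ _
    · exact subG_refl _
  · exact subG_refl _

theorem bfsStep_covers (mine : List (List Int)) (N M : Nat) (d : Int) (r c : Nat)
    (st : List (Nat × Nat) × List (List Bool) × Int) (dx dy : Int)
    (hg : 0 ≤ (r : Int) + dx ∧ (r : Int) + dx < (N : Int) ∧ 0 ≤ (c : Int) + dy ∧ (c : Int) + dy < (M : Int))
    (hsh : cellD mine ((r : Int) + dx).toNat ((c : Int) + dy).toNat ≤ d) :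
    g2 (bfsStep mine N M d r c st (dx, dy)).2.1 ((r : Int) + dx).toNat ((c : Int) + dy).toNat = true := by
  rw [bfsStep_eq, if_pos hg]
  split
  · exact g2_s2_self st.2.1 _ _
  · rename_i hneg
    cases hgv : g2 st.2.1 (((r : Int) + dx).toNat) (((c : Int) + dy).toNat)
    · exact absurd ⟨hsh, hgv⟩ hneg
    · rfl

theorem bfsFold_all (mine : List (List Int)) (N M : Nat) (d : Int) (r c : Nat)
    (v : List (List Bool)) (qs : List (Nat × Nat)) (t : Int) (S : List (List Bool))
    (hr : r < N) (hc : c < M) (hS : ClosedG mine d N M S) (hmS : g2 S r c = true)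
    (hst0 : BfsMid mine d N M v qs t S (qs, v, t)) :
    BfsMid mine d N M v qs t S (dirsA.foldl (bfsStep mine N M d r c) (qs, v, t)) ∧
    (∀ a b, a < N → b < M → AdjG r c a b → cellD mine a b ≤ d →
      g2 (dirsA.foldl (bfsStep mine N M d r c) (qs, v, t)).2.1 a b = true) := by
  have hmem1 : ((-1 : Int), (0 : Int)) ∈ dirsA := by simp [dirsA]
  have hmem2 : ((1 : Int), (0 : Int)) ∈ dirsA := by simp [dirsA]
  have hmem3 : ((0 : Int), (-1 : Int)) ∈ dirsA := by simp [dirsA]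
  have hmem4 : ((0 : Int), (1 : Int)) ∈ dirsA := by simp [dirsA]
  have hfold : dirsA.foldl (bfsStep mine N M d r c) (qs, v, t) =
      bfsStep mine N M d r c
        (bfsStep mine N M d r c
          (bfsStep mine N M d r c
            (bfsStep mine N M d r c (qs, v, t) (-1, 0)) (1, 0)) (0, -1)) (0, 1) := rfl
  have m1 := bfsStep_mid mine N M d r c v qs t S hr hc hS hmS (-1, 0) hmem1 _ hst0
  have m2 := bfsStep_mid mine N M d r c v qs t S hr hc hS hmS (1, 0) hmem2 _ m1
  have m3 := bfsStep_mid mine N M d r c v qs t S hr hc hS hmS (0, -1) hmem3 _ m2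
  have m4 := bfsStep_mid mine N M d r c v qs t S hr hc hS hmS (0, 1) hmem4 _ m3
  constructor
  · rw [hfold]; exact m4
  · intro a b ha hb hadj hsh
    rw [hfold]
    rcases hadj with ⟨e1, e2⟩ | ⟨e1, e2⟩ | ⟨e1, e2⟩ | ⟨e1, e2⟩
    · -- a = r + 1, b = c : direction (1,0), applied second; carry 2 steps
      have hg : 0 ≤ (r : Int) + 1 ∧ (r : Int) + 1 < (N : Int) ∧ 0 ≤ (c : Int) + 0 ∧ (c : Int) + 0 < (M : Int) := by
        constructor; omega; constructor; omega; constructor; omega; omega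
      have he1 : ((r : Int) + 1).toNat = a := by omega
      have he2 : ((c : Int) + 0).toNat = b := by omega
      have hcv := bfsStep_covers mine N M d r c
        (bfsStep mine N M d r c (qs, v, t) (-1, 0)) 1 0 hg (by rw [he1, he2]; exact hsh)
      rw [he1, he2] at hcv
      exact bfsStep_sub mine N M d r c _ (0, 1) a b (bfsStep_sub mine N M d r c _ (0, -1) a b hcv)
    · -- r = a + 1, b = c : direction (-1,0), applied first; carry 3 steps
      have hg : 0 ≤ (r : Int) + (-1) ∧ (r : Int) + (-1) < (N : Int) ∧ 0 ≤ (c : Int) + 0 ∧ (c : Int) + 0 < (M : Int) := by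
        constructor; omega; constructor; omega; constructor; omega; omega
      have he1 : ((r : Int) + (-1)).toNat = a := by omega
      have he2 : ((c : Int) + 0).toNat = b := by omega
      have hcv := bfsStep_covers mine N M d r c (qs, v, t) (-1) 0 hg (by rw [he1, he2]; exact hsh)
      rw [he1, he2] at hcv
      exact bfsStep_sub mine N M d r c _ (0, 1) a b
        (bfsStep_sub mine N M d r c _ (0, -1) a b
          (bfsStep_sub mine N M d r c _ (1, 0) a b hcv))
    · -- a = r, b = c + 1 : direction (0,1), applied last
      have hg : 0 ≤ (r : Int) + 0 ∧ (r : Int) + 0 < (N : Int) ∧ 0 ≤ (c : Int) + 1 ∧ (c : Int) + 1 < (M : Int) := by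
        constructor; omega; constructor; omega; constructor; omega; omega
      have he1 : ((r : Int) + 0).toNat = a := by omega
      have he2 : ((c : Int) + 1).toNat = b := by omega
      have hcv := bfsStep_covers mine N M d r c
        (bfsStep mine N M d r c
          (bfsStep mine N M d r c (bfsStep mine N M d r c (qs, v, t) (-1, 0)) (1, 0)) (0, -1))
        0 1 hg (by rw [he1, he2]; exact hsh)
      rw [he1, he2] at hcv
      exact hcv
    · -- a = r, c = b + 1 : direction (0,-1), applied third; carry 1 step
      have hg : 0 ≤ (r : Int) + 0 ∧ (r : Int) + 0 < (N : Int) ∧ 0 ≤ (c : Int) + (-1) ∧ (c : Int) + (-1) < (M : Int) := by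
        constructor; omega; constructor; omega; constructor; omega; omega
      have he1 : ((r : Int) + 0).toNat = a := by omega
      have he2 : ((c : Int) + (-1)).toNat = b := by omega
      have hcv := bfsStep_covers mine N M d r c
        (bfsStep mine N M d r c (bfsStep mine N M d r c (qs, v, t) (-1, 0)) (1, 0))
        0 (-1) hg (by rw [he1, he2]; exact hsh)
      rw [he1, he2] at hcv
      exact bfsStep_sub mine N M d r c _ (0, 1) a b hcv

theorem bfsLoop_nil (mine : List (List Int)) (N M : Nat) (k d : Int) (fuel : Nat)
    (v : List (List Bool)) (t : Int) :
    bfsLoop mine N M k d fuel [] v t = decide (k ≤ t) := by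
  cases fuel <;> rfl

theorem bfsLoop_cons (mine : List (List Int)) (N M : Nat) (k d : Int) (fuel : Nat)
    (r c : Nat) (qs : List (Nat × Nat)) (v : List (List Bool)) (t : Int) :
    bfsLoop mine N M k d (fuel + 1) ((r, c) :: qs) v t =
      if k ≤ t then true
      else
        bfsLoop mine N M k d fuel
          (dirsA.foldl (bfsStep mine N M d r c) (qs, v, t)).1
          (dirsA.foldl (bfsStep mine N M d r c) (qs, v, t)).2.1
          (dirsA.foldl (bfsStep mine N M d r c) (qs, v, t)).2.2 := rfl

theorem satof_id_of_closed (mine : List (List Int)) (N M : Nat) (d : Int) (v : List (List Bool))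
    (hcl : ClosedG mine d N M v) : SatOf mine N M d v = v := by
  rw [SatOf, satLoop_succ, closed_sweep_id mine N M d v hcl]
  simp

theorem bfs_main (mine : List (List Int)) (N M : Nat) (k d : Int) :
    ∀ (fuel : Nat) (q : List (Nat × Nat)) (v : List (List Bool)) (t : Int),
      ShapeG N M v →
      (∀ p ∈ q, g2 v p.1 p.2 = true ∧ p.1 < N ∧ p.2 < M) →
      (∀ a b, a < N → b < M → g2 v a b = true → (a, b) ∈ q ∨
        (∀ a' b', a' < N → b' < M → AdjG a b a' b' → cellD mine a' b' ≤ d → g2 v a' b' = true)) →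
      2 * cf2 v + q.length ≤ fuel →
      bfsLoop mine N M k d fuel q v t =
        decide (k ≤ t + ((cnt2 (SatOf mine N M d v) : Int) - (cnt2 v : Int))) := by
  intro fuel
  induction fuel with
  | zero =>
    intro q v t hsh hq hfr hm
    have hq0 : q = [] := by
      cases q with
      | nil => rfl
      | cons p qs => simp only [List.length_cons] at hm; omega
    subst hq0
    have hcl : ClosedG mine d N M v := by
      intro r c a b hr hc ha hb hadj hg hshallow
      rcases hfr r c hr hc hg with h | h
      · cases h
      · exact h a b ha hb hadj hshallow
    rw [bfsLoop_nil, satof_id_of_closed mine N M d v hcl, sub_self, add_zero]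
  | succ fuel ih =>
    intro q v t hsh hq hfr hm
    cases q with
    | nil =>
      have hcl : ClosedG mine d N M v := by
        intro r c a b hr hc ha hb hadj hg hshallow
        rcases hfr r c hr hc hg with h | h
        · cases h
        · exact h a b ha hb hadj hshallow
      rw [bfsLoop_nil, satof_id_of_closed mine N M d v hcl, sub_self, add_zero]
    | cons p qs =>
      obtain ⟨r, c⟩ := p
      rw [bfsLoop_cons]
      obtain ⟨hgrc, hr, hc⟩ := hq (r, c) (by simp)
      by_cases hk : k ≤ t
      · rw [if_pos hk]
        have hcnt : cnt2 v ≤ cnt2 (SatOf mine N M d v) := satLoop_cnt mine N M d (cf2 v + 1) v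
        have : k ≤ t + ((cnt2 (SatOf mine N M d v) : Int) - (cnt2 v : Int)) := by
          have : (cnt2 v : Int) ≤ (cnt2 (SatOf mine N M d v) : Int) := by exact_mod_cast hcnt
          omega
        simp [this]
      · rw [if_neg hk]
        obtain ⟨hshS, hsubS, hclS⟩ := satLoop_props mine N M d (cf2 v + 1) v hsh (by omega)
        have hmS : g2 (SatOf mine N M d v) r c = true := hsubS r c hgrc
        have hst0 : BfsMid mine d N M v qs t (SatOf mine N M d v) (qs, v, t) := by
          refine ⟨hsh, subG_refl v, hsubS, ?_, fun p hp => hp, fun a b h => Or.inl h, rfl, Nat.le_refl _⟩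
          intro p hp
          exact hq p (by simp [hp])
        obtain ⟨hmid, hcov⟩ := bfsFold_all mine N M d r c v qs t (SatOf mine N M d v)
          hr hc hclS hmS hst0
        obtain ⟨j1, j2, j3, j4, j5, j6, j7, j8⟩ := hmid
        have hfr' : ∀ a b, a < N → b < M →
            g2 (dirsA.foldl (bfsStep mine N M d r c) (qs, v, t)).2.1 a b = true →
            (a, b) ∈ (dirsA.foldl (bfsStep mine N M d r c) (qs, v, t)).1 ∨
            (∀ a' b', a' < N → b' < M → AdjG a b a' b' → cellD mine a' b' ≤ d →
              g2 (dirsA.foldl (bfsStep mine N M d r c) (qs, v, t)).2.1 a' b' = true) := by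
          intro a b ha hb hg2
          rcases j6 a b hg2 with hold | hin
          · rcases hfr a b ha hb hold with hmem | hnb
            · rcases List.mem_cons.1 hmem with heq | htl
              · right
                intro a' b' ha' hb' hadj hsh'
                have : r = a ∧ c = b := by
                  injection heq with e1 e2; exact ⟨e1.symm, e2.symm⟩
                obtain ⟨e1, e2⟩ := this
                subst e1; subst e2
                exact hcov a' b' ha' hb' hadj hsh'
              · exact Or.inl (j5 (a, b) htl)
            · right
              intro a' b' ha' hb' hadj hsh'
              exact j2 a' b' (hnb a' b' ha' hb' hadj hsh')
          · exact Or.inl hin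
        have hm' : 2 * cf2 (dirsA.foldl (bfsStep mine N M d r c) (qs, v, t)).2.1 +
            (dirsA.foldl (bfsStep mine N M d r c) (qs, v, t)).1.length ≤ fuel := by
          have h9 : 2 * cf2 v + (qs.length + 1) ≤ fuel + 1 := by simpa using hm
          omega
        rw [ih _ _ _ j1 j4 hfr' hm']
        have hsat : SatOf mine N M d (dirsA.foldl (bfsStep mine N M d r c) (qs, v, t)).2.1 =
            SatOf mine N M d v := by
          rw [SatOf, SatOf]
          exact sat_invariant mine N M d v _ hsh j1 j2 j3
        rw [hsat]
        have heq : (dirsA.foldl (bfsStep mine N M d r c) (qs, v, t)).2.2 +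
            ((cnt2 (SatOf mine N M d v) : Int) - (cnt2 (dirsA.foldl (bfsStep mine N M d r c) (qs, v, t)).2.1 : Int)) =
            t + ((cnt2 (SatOf mine N M d v) : Int) - (cnt2 v : Int)) := by
          omega
        rw [heq]


-- seeding lemmas
def ASt (mine : List (List Int)) (d : Int) (N M : Nat) :
    List (Nat × Nat) × List (List Bool) × Int :=
  (List.range' 1 (N - 1)).foldl (seedStepA1 mine d M)
    ((List.range M).foldl (seedStepA0 mine d) ([], List.replicate N (List.replicate M false), 0))

def BSt (mine : List (List Int)) (d : Int) (N M : Nat) : List (List Bool) :=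
  (List.range' 1 (N - 1)).foldl (seedStepB1 mine d M)
    ((List.range M).foldl (seedStepB0 mine d) (List.replicate N (List.replicate M false)))

theorem mining_def (mine : List (List Int)) (n m k d : Int) :
    mining mine n m k d =
      bfsLoop mine n.toNat m.toNat k d
        (2 * cf2 (ASt mine d n.toNat m.toNat).2.1 + (ASt mine d n.toNat m.toNat).1.length + 1)
        (ASt mine d n.toNat m.toNat).1 (ASt mine d n.toNat m.toNat).2.1
        (ASt mine d n.toNat m.toNat).2.2 := rfl

theorem alt_def (mine : List (List Int)) (n m k d : Int) :
    mining_alt mine n m k d =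
      decide (k ≤ (cnt2 (satLoop mine n.toNat m.toNat d (cf2 (BSt mine d n.toNat m.toNat) + 1)
        (BSt mine d n.toNat m.toNat)) : Int)) := rfl

theorem seedA0_grid (mine : List (List Int)) (d : Int) :
    ∀ (l : List Nat) (st : List (Nat × Nat) × List (List Bool) × Int),
      (l.foldl (seedStepA0 mine d) st).2.1 = l.foldl (seedStepB0 mine d) st.2.1 := by
  intro l
  induction l with
  | nil => intro st; rfl
  | cons i l ih =>
    intro st
    rw [List.foldl_cons, List.foldl_cons, ih]
    have : (seedStepA0 mine d st i).2.1 = seedStepB0 mine d st.2.1 i := by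
      rw [seedStepA0, seedStepB0]; split <;> rfl
    rw [this]

theorem seedA1_grid (mine : List (List Int)) (d : Int) (M : Nat) :
    ∀ (l : List Nat) (st : List (Nat × Nat) × List (List Bool) × Int),
      (l.foldl (seedStepA1 mine d M) st).2.1 = l.foldl (seedStepB1 mine d M) st.2.1 := by
  intro l
  induction l with
  | nil => intro st; rfl
  | cons i l ih =>
    intro st
    rw [List.foldl_cons, List.foldl_cons, ih]
    have : (seedStepA1 mine d M st i).2.1 = seedStepB1 mine d M st.2.1 i := by
      rw [seedStepA1, seedStepB1]
      split <;> split <;> rfl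
    rw [this]

theorem ASt_grid (mine : List (List Int)) (d : Int) (N M : Nat) :
    (ASt mine d N M).2.1 = BSt mine d N M := by
  rw [ASt, BSt, seedA1_grid, seedA0_grid]

theorem alt_eq_sat (mine : List (List Int)) (n m k d : Int) :
    mining_alt mine n m k d =
      decide (k ≤ (cnt2 (SatOf mine n.toNat m.toNat d (ASt mine d n.toNat m.toNat).2.1) : Int)) := by
  rw [alt_def, ← ASt_grid, SatOf]

def SeedInv (N M : Nat) (st : List (Nat × Nat) × List (List Bool) × Int) : Prop :=
  ShapeG N M st.2.1 ∧ (∀ p ∈ st.1, g2 st.2.1 p.1 p.2 = true ∧ p.1 < N ∧ p.2 < M) ∧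
  (∀ a b, a < N → b < M → g2 st.2.1 a b = true → (a, b) ∈ st.1)

theorem seedInv_push (N M : Nat) (st : List (Nat × Nat) × List (List Bool) × Int)
    (r c : Nat) (hr : r < N) (hc : c < M) (h : SeedInv N M st) (t' : Int) :
    SeedInv N M (st.1 ++ [(r, c)], s2 st.2.1 r c, t') := by
  obtain ⟨h1, h2, h3⟩ := h
  refine ⟨shape_s2 N M st.2.1 r c h1, ?_, ?_⟩
  · intro p hp
    rcases List.mem_append.1 hp with hp | hp
    · obtain ⟨hg, hp1, hp2⟩ := h2 p hp
      exact ⟨sub_s2 st.2.1 r c p.1 p.2 hg, hp1, hp2⟩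
    · simp only [List.mem_singleton] at hp
      subst hp
      exact ⟨g2_s2_self st.2.1 r c, hr, hc⟩
  · intro a b ha hb hg
    by_cases hab : r = a ∧ c = b
    · obtain ⟨e1, e2⟩ := hab
      subst e1; subst e2
      exact List.mem_append_right _ (by simp)
    · rw [g2_s2_ne st.2.1 r c a b hab] at hg
      exact List.mem_append_left _ (h3 a b ha hb hg)

theorem seed0_inv (mine : List (List Int)) (d : Int) (N M : Nat) (hN : 0 < N) :
    ∀ (l : List Nat), (∀ i ∈ l, i < M) →
      ∀ st, SeedInv N M st → SeedInv N M (l.foldl (seedStepA0 mine d) st) := by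
  intro l
  induction l with
  | nil => intro _ st h; exact h
  | cons i l ih =>
    intro hmem st h
    rw [List.foldl_cons]
    refine ih (fun j hj => hmem j (by simp [hj])) _ ?_
    rw [seedStepA0]
    split
    · exact seedInv_push N M st 0 i hN (hmem i (by simp)) h _
    · exact h

theorem seed1_inv (mine : List (List Int)) (d : Int) (N M : Nat) (hM : 0 < M) :
    ∀ (l : List Nat), (∀ i ∈ l, i < N) →
      ∀ st, SeedInv N M st → SeedInv N M (l.foldl (seedStepA1 mine d M) st) := by
  intro l
  induction l with
  | nil => intro _ st h; exact h
  | cons i l ih =>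
    intro hmem st h
    rw [List.foldl_cons]
    refine ih (fun j hj => hmem j (by simp [hj])) _ ?_
    rw [seedStepA1]
    have h1 : SeedInv N M (if cellD mine i 0 ≤ d then
        (st.1 ++ [(i, 0)], s2 st.2.1 i 0, st.2.2 + 1) else st) := by
      split
      · exact seedInv_push N M st i 0 (hmem i (by simp)) hM h _
      · exact h
    split
    · exact seedInv_push N M _ i (M - 1) (hmem i (by simp)) (by omega) h1 _
    · exact h1

theorem seed0_delta (mine : List (List Int)) (d : Int) :
    ∀ (l : List Nat), l.Nodup →
      ∀ st, (∀ i ∈ l, g2 st.2.1 0 i = false) →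
      (l.foldl (seedStepA0 mine d) st).2.2 - (cnt2 (l.foldl (seedStepA0 mine d) st).2.1 : Int) =
        st.2.2 - (cnt2 st.2.1 : Int) := by
  intro l
  induction l with
  | nil => intro _ st _; rfl
  | cons i l ih =>
    intro hnd st hpre
    have hnd' : l.Nodup := (List.nodup_cons.1 hnd).2
    have hni : i ∉ l := (List.nodup_cons.1 hnd).1
    rw [List.foldl_cons, seedStepA0]
    split
    · have hfalse : g2 st.2.1 0 i = false := hpre i (by simp)
      have hcnt := cnt2_s2_false st.2.1 0 i hfalse
      rw [ih hnd' _ ?_]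
      · simp only [hcnt]
        push_cast
        ring
      · intro j hj
        rw [g2_s2_ne st.2.1 0 i 0 j (by
          rintro ⟨_, e2⟩; subst e2; exact hni hj)]
        exact hpre j (by simp [hj])
    · exact ih hnd' _ (fun j hj => hpre j (by simp [hj]))

theorem seed0_preserve (mine : List (List Int)) (d : Int) :
    ∀ (l : List Nat) (st : List (Nat × Nat) × List (List Bool) × Int) (a b : Nat), 0 < a →
      g2 (l.foldl (seedStepA0 mine d) st).2.1 a b = g2 st.2.1 a b := by
  intro l
  induction l with
  | nil => intro st a b _; rfl
  | cons i l ih =>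
    intro st a b ha
    rw [List.foldl_cons, seedStepA0]
    split
    · rw [ih _ a b ha]
      exact g2_s2_ne st.2.1 0 i a b (by rintro ⟨e1, _⟩; omega)
    · exact ih st a b ha

theorem seed1_delta (mine : List (List Int)) (d : Int) (M : Nat) (hM : 2 ≤ M) :
    ∀ (l : List Nat), l.Nodup →
      ∀ st, (∀ i ∈ l, g2 st.2.1 i 0 = false ∧ g2 st.2.1 i (M - 1) = false) →
      (l.foldl (seedStepA1 mine d M) st).2.2 - (cnt2 (l.foldl (seedStepA1 mine d M) st).2.1 : Int) =
        st.2.2 - (cnt2 st.2.1 : Int) := by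
  intro l
  induction l with
  | nil => intro _ st _; rfl
  | cons i l ih =>
    intro hnd st hpre
    have hnd' : l.Nodup := (List.nodup_cons.1 hnd).2
    have hni : i ∉ l := (List.nodup_cons.1 hnd).1
    have hp := hpre i (by simp)
    have hne01 : (0 : Nat) ≠ M - 1 := by omega
    rw [List.foldl_cons, seedStepA1]
    by_cases hs1 : cellD mine i 0 ≤ d <;> by_cases hs2 : cellD mine i (M - 1) ≤ d
    · rw [if_pos hs1]
      simp only []
      rw [if_pos hs2]
      have hc1 := cnt2_s2_false st.2.1 i 0 hp.1
      have hg2' : g2 (s2 st.2.1 i 0) i (M - 1) = false := by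
        rw [g2_s2_ne st.2.1 i 0 i (M - 1) (by rintro ⟨_, e2⟩; exact hne01 e2)]
        exact hp.2
      have hc2 := cnt2_s2_false _ i (M - 1) hg2'
      rw [ih hnd' _ ?_]
      · simp only [hc2, hc1]
        push_cast
        ring
      · intro j hj
        have hji : ¬(i = j) := fun e => hni (e ▸ hj)
        constructor
        · rw [g2_s2_ne _ i (M - 1) j 0 (by rintro ⟨e1, _⟩; exact hji e1),
            g2_s2_ne _ i 0 j 0 (by rintro ⟨e1, _⟩; exact hji e1)]
          exact (hpre j (by simp [hj])).1
        · rw [g2_s2_ne _ i (M - 1) j (M - 1) (by rintro ⟨e1, _⟩; exact hji e1),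
            g2_s2_ne _ i 0 j (M - 1) (by rintro ⟨e1, _⟩; exact hji e1)]
          exact (hpre j (by simp [hj])).2
    · rw [if_pos hs1]
      simp only []
      rw [if_neg hs2]
      have hc1 := cnt2_s2_false st.2.1 i 0 hp.1
      rw [ih hnd' _ ?_]
      · simp only [hc1]
        push_cast
        ring
      · intro j hj
        have hji : ¬(i = j) := fun e => hni (e ▸ hj)
        constructor
        · rw [g2_s2_ne _ i 0 j 0 (by rintro ⟨e1, _⟩; exact hji e1)]
          exact (hpre j (by simp [hj])).1
        · rw [g2_s2_ne _ i 0 j (M - 1) (by rintro ⟨e1, _⟩; exact hji e1)]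
          exact (hpre j (by simp [hj])).2
    · rw [if_neg hs1]
      rw [if_pos hs2]
      have hc2 := cnt2_s2_false st.2.1 i (M - 1) hp.2
      rw [ih hnd' _ ?_]
      · simp only [hc2]
        push_cast
        ring
      · intro j hj
        have hji : ¬(i = j) := fun e => hni (e ▸ hj)
        constructor
        · rw [g2_s2_ne _ i (M - 1) j 0 (by rintro ⟨e1, _⟩; exact hji e1)]
          exact (hpre j (by simp [hj])).1
        · rw [g2_s2_ne _ i (M - 1) j (M - 1) (by rintro ⟨e1, _⟩; exact hji e1)]
          exact (hpre j (by simp [hj])).2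
    · rw [if_neg hs1]
      rw [if_neg hs2]
      exact ih hnd' _ (fun j hj => hpre j (by simp [hj]))

theorem seedStepA1_col_eq (mine : List (List Int)) (d : Int)
    (st : List (Nat × Nat) × List (List Bool) × Int) (i : Nat) :
    seedStepA1 mine d 1 st i =
      if cellD mine i 0 ≤ d then
        ((st.1 ++ [(i, 0)]) ++ [(i, 0)], s2 (s2 st.2.1 i 0) i 0, st.2.2 + 1 + 1)
      else st := by
  rw [seedStepA1]
  by_cases hs : cellD mine i 0 ≤ d
  · simp [hs]
  · simp [hs]

theorem seed1_col (mine : List (List Int)) (d : Int) :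
    ∀ (l : List Nat), l.Nodup →
      ∀ st, (∀ i ∈ l, g2 st.2.1 i 0 = false) →
      (l.foldl (seedStepA1 mine d 1) st).2.2 =
          st.2.2 + 2 * ((l.countP (fun i => decide (cellD mine i 0 ≤ d))) : Int) ∧
      (cnt2 (l.foldl (seedStepA1 mine d 1) st).2.1 : Int) =
          (cnt2 st.2.1 : Int) + ((l.countP (fun i => decide (cellD mine i 0 ≤ d))) : Int) ∧
      (∀ a b, a ∉ l → g2 (l.foldl (seedStepA1 mine d 1) st).2.1 a b = g2 st.2.1 a b) ∧
      (∀ i ∈ l, g2 (l.foldl (seedStepA1 mine d 1) st).2.1 i 0 = decide (cellD mine i 0 ≤ d)) := by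
  intro l
  induction l with
  | nil =>
    intro _ st _
    refine ⟨by simp, by simp, fun a b _ => rfl, fun i hi => absurd hi (by simp)⟩
  | cons i l ih =>
    intro hnd st hpre
    have hnd' : l.Nodup := (List.nodup_cons.1 hnd).2
    have hni : i ∉ l := (List.nodup_cons.1 hnd).1
    have hp : g2 st.2.1 i 0 = false := hpre i (by simp)
    rw [List.foldl_cons, seedStepA1_col_eq]
    by_cases hs : cellD mine i 0 ≤ d
    · rw [if_pos hs]
      have hcp : (i :: l).countP (fun j => decide (cellD mine j 0 ≤ d)) =
          l.countP (fun j => decide (cellD mine j 0 ≤ d)) + 1 := by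
        simp [List.countP_cons, hs]
      have hg1 : g2 (s2 st.2.1 i 0) i 0 = true := g2_s2_self st.2.1 i 0
      have hc1 := cnt2_s2_false st.2.1 i 0 hp
      have hc2 := cnt2_s2_true (s2 st.2.1 i 0) i 0 hg1
      have hpre' : ∀ j ∈ l, g2 (s2 (s2 st.2.1 i 0) i 0) j 0 = false := by
        intro j hj
        have hji : ¬(i = j) := fun e => hni (e ▸ hj)
        rw [g2_s2_ne _ i 0 j 0 (by rintro ⟨e1, _⟩; exact hji e1),
          g2_s2_ne _ i 0 j 0 (by rintro ⟨e1, _⟩; exact hji e1)]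
        exact hpre j (by simp [hj])
      obtain ⟨i1, i2, i3, i4⟩ := ih hnd'
        ((st.1 ++ [(i, 0)]) ++ [(i, 0)], s2 (s2 st.2.1 i 0) i 0, st.2.2 + 1 + 1) hpre'
      refine ⟨?_, ?_, ?_, ?_⟩
      · rw [i1, hcp]
        push_cast
        ring
      · rw [i2, hc2, hc1, hcp]
        push_cast
        ring
      · intro a b hab
        have hai : ¬(i = a) := by
          intro e; subst e; exact hab (by simp)
        rw [i3 a b (fun hmem => hab (by simp [hmem]))]
        rw [g2_s2_ne _ i 0 a b (by rintro ⟨e1, _⟩; exact hai e1),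
          g2_s2_ne _ i 0 a b (by rintro ⟨e1, _⟩; exact hai e1)]
      · intro j hj
        rcases List.mem_cons.1 hj with heq | hj'
        · subst heq
          rw [i3 j 0 hni]
          show g2 (s2 (s2 st.2.1 j 0) j 0) j 0 = decide (cellD mine j 0 ≤ d)
          rw [g2_s2_self]
          simp [hs]
        · exact i4 j hj'
    · rw [if_neg hs]
      have hcp : (i :: l).countP (fun j => decide (cellD mine j 0 ≤ d)) =
          l.countP (fun j => decide (cellD mine j 0 ≤ d)) := by
        simp [List.countP_cons, hs]
      obtain ⟨i1, i2, i3, i4⟩ := ih hnd' st (fun j hj => hpre j (by simp [hj]))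
      refine ⟨?_, ?_, ?_, ?_⟩
      · rw [i1, hcp]
      · rw [i2, hcp]
      · intro a b hab
        exact i3 a b (fun hmem => hab (by simp [hmem]))
      · intro j hj
        rcases List.mem_cons.1 hj with heq | hj'
        · subst heq
          rw [i3 j 0 hni, hp]
          simp [hs]
          
        · exact i4 j hj'


-- assembly
theorem SeedInv_ASt (mine : List (List Int)) (d : Int) (N M : Nat) (hN : 0 < N) (hM : 0 < M) :
    SeedInv N M (ASt mine d N M) := by
  rw [ASt]
  refine seed1_inv mine d N M hM _ ?_ _ (seed0_inv mine d N M hN _ ?_ _ ?_)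
  · intro i hi
    rw [List.mem_range'] at hi
    obtain ⟨j, hj, e⟩ := hi
    omega
  · intro i hi
    exact List.mem_range.1 hi
  · refine ⟨shape_replicate N M, ?_, ?_⟩
    · intro p hp; cases hp
    · intro a b ha hb hg
      rw [g2_replicate N M a b ha hb] at hg
      cases hg

theorem mining_eq (mine : List (List Int)) (n m k d : Int)
    (hN : 0 < n.toNat) (hM : 0 < m.toNat) :
    mining mine n m k d =
      decide (k ≤ (ASt mine d n.toNat m.toNat).2.2 +
        ((cnt2 (SatOf mine n.toNat m.toNat d (ASt mine d n.toNat m.toNat).2.1) : Int) -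
          (cnt2 (ASt mine d n.toNat m.toNat).2.1 : Int))) := by
  rw [mining_def]
  have hinv := SeedInv_ASt mine d n.toNat m.toNat hN hM
  exact bfs_main mine n.toNat m.toNat k d _ _ _ _ hinv.1 hinv.2.1
    (fun a b ha hb hg => Or.inl (hinv.2.2 a b ha hb hg)) (by omega)

theorem ASt_delta (mine : List (List Int)) (d : Int) (N M : Nat) (hN : 0 < N) (hM : 2 ≤ M) :
    (ASt mine d N M).2.2 = (cnt2 (ASt mine d N M).2.1 : Int) := by
  have h0 := seed0_delta mine d (List.range M) (List.nodup_range)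
    ([], List.replicate N (List.replicate M false), 0)
    (fun i hi => g2_replicate N M 0 i hN (List.mem_range.1 hi))
  have hpre1 : ∀ i ∈ List.range' 1 (N - 1),
      g2 ((List.range M).foldl (seedStepA0 mine d)
        ([], List.replicate N (List.replicate M false), 0)).2.1 i 0 = false ∧
      g2 ((List.range M).foldl (seedStepA0 mine d)
        ([], List.replicate N (List.replicate M false), 0)).2.1 i (M - 1) = false := by
    intro i hi
    rw [List.mem_range'] at hi
    obtain ⟨j, hj, e⟩ := hi
    constructor
    · rw [seed0_preserve mine d _ _ i 0 (by omega)]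
      exact g2_replicate N M i 0 (by omega) (by omega)
    · rw [seed0_preserve mine d _ _ i (M - 1) (by omega)]
      exact g2_replicate N M i (M - 1) (by omega) (by omega)
  have h1 := seed1_delta mine d M hM (List.range' 1 (N - 1)) (List.nodup_range' 1) _ hpre1
  rw [ASt] at *
  have hrep : cnt2 (List.replicate N (List.replicate M false)) = 0 := cnt2_replicate N M
  simp only [hrep] at h0
  omega

theorem ASt_col (mine : List (List Int)) (d : Int) (N : Nat) (hN : 0 < N) :
    (ASt mine d N 1).2.2 = (if cellD mine 0 0 ≤ d then (1 : Int) else 0) +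
        2 * (((List.range' 1 (N - 1)).countP (fun i => decide (cellD mine i 0 ≤ d))) : Int) ∧
    (cnt2 (ASt mine d N 1).2.1 : Int) = (if cellD mine 0 0 ≤ d then (1 : Int) else 0) +
        (((List.range' 1 (N - 1)).countP (fun i => decide (cellD mine i 0 ≤ d))) : Int) ∧
    ClosedG mine d N 1 (ASt mine d N 1).2.1 := by
  have h01 : ¬(0 : Nat) = 1 - 1 + 1 := by omega
  -- phase 0 state
  have hr1 : (List.range 1) = [0] := rfl
  have hG : g2 (List.replicate N (List.replicate 1 false)) 0 0 = false :=
    g2_replicate N 1 0 0 hN (by omega)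
  -- facts about st0
  have hstep : (List.range 1).foldl (seedStepA0 mine d)
      ([], List.replicate N (List.replicate 1 false), 0) =
      (if cellD mine 0 0 ≤ d then
        ([((0 : Nat), (0 : Nat))], s2 (List.replicate N (List.replicate 1 false)) 0 0, (1 : Int))
      else ([], List.replicate N (List.replicate 1 false), 0)) := by
    rw [hr1]
    show seedStepA0 mine d ([], List.replicate N (List.replicate 1 false), 0) 0 = _
    rw [seedStepA0]
    split <;> rfl
  have hst0 :
      (cnt2 ((List.range 1).foldl (seedStepA0 mine d)
        ([], List.replicate N (List.replicate 1 false), 0)).2.1 : Int) =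
        (if cellD mine 0 0 ≤ d then (1 : Int) else 0) ∧
      ((List.range 1).foldl (seedStepA0 mine d)
        ([], List.replicate N (List.replicate 1 false), 0)).2.2 =
        (if cellD mine 0 0 ≤ d then (1 : Int) else 0) ∧
      (∀ j, 0 < j → j < N →
        g2 ((List.range 1).foldl (seedStepA0 mine d)
          ([], List.replicate N (List.replicate 1 false), 0)).2.1 j 0 = false) ∧
      (g2 ((List.range 1).foldl (seedStepA0 mine d)
          ([], List.replicate N (List.replicate 1 false), 0)).2.1 0 0 =
        decide (cellD mine 0 0 ≤ d)) := by
    rw [hstep]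
    by_cases hs0 : cellD mine 0 0 ≤ d
    · rw [if_pos hs0]
      refine ⟨?_, by simp [hs0], ?_, ?_⟩
      · show (cnt2 (s2 (List.replicate N (List.replicate 1 false)) 0 0) : Int) = _
        rw [cnt2_s2_false _ 0 0 hG, cnt2_replicate N 1]
        simp [hs0]
      · intro j hj1 hj2
        show g2 (s2 (List.replicate N (List.replicate 1 false)) 0 0) j 0 = false
        rw [g2_s2_ne _ 0 0 j 0 (by rintro ⟨e1, _⟩; omega)]
        exact g2_replicate N 1 j 0 (by omega) (by omega)
      · show g2 (s2 (List.replicate N (List.replicate 1 false)) 0 0) 0 0 = _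
        rw [g2_s2_self]
        simp [hs0]
    · rw [if_neg hs0]
      refine ⟨?_, by simp [hs0], ?_, ?_⟩
      · show (cnt2 (List.replicate N (List.replicate 1 false)) : Int) = _
        rw [cnt2_replicate N 1]
        simp [hs0]
      · intro j hj1 hj2
        exact g2_replicate N 1 j 0 (by omega) (by omega)
      · rw [hG]
        simp [hs0]
  obtain ⟨hc0, ht0, hfalse0, hchar0⟩ := hst0
  have hpre1 : ∀ i ∈ List.range' 1 (N - 1),
      g2 ((List.range 1).foldl (seedStepA0 mine d)
        ([], List.replicate N (List.replicate 1 false), 0)).2.1 i 0 = false := by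
    intro i hi
    rw [List.mem_range'] at hi
    obtain ⟨j, hj, e⟩ := hi
    exact hfalse0 i (by omega) (by omega)
  obtain ⟨p1, p2, p3, p4⟩ := seed1_col mine d (List.range' 1 (N - 1)) (List.nodup_range' 1) _ hpre1
  have hnotmem0 : (0 : Nat) ∉ List.range' 1 (N - 1) := by
    intro hmem
    rw [List.mem_range'] at hmem
    obtain ⟨j, hj, e⟩ := hmem
    omega
  have hcharAll : ∀ a, a < N →
      g2 (ASt mine d N 1).2.1 a 0 = decide (cellD mine a 0 ≤ d) := by
    intro a ha
    by_cases ha0 : a = 0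
    · subst ha0
      rw [ASt, p3 0 0 hnotmem0, hchar0]
    · have : a ∈ List.range' 1 (N - 1) := by
        rw [List.mem_range']
        exact ⟨a - 1, by omega, by omega⟩
      rw [ASt]
      exact p4 a this
  refine ⟨?_, ?_, ?_⟩
  · rw [ASt, p1, ht0]
  · rw [ASt, p2, hc0]
  · intro r c a b hr hc ha hb hadj hg hsl
    have hc0' : c = 0 := by omega
    have hb0' : b = 0 := by omega
    subst hc0'; subst hb0'
    rw [hcharAll a ha]
    simpa using hsl

theorem fold0_id (mine : List (List Int)) (d : Int) :
    ∀ (l : List Nat), (∀ i ∈ l, ¬(cellD mine 0 i ≤ d)) →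
      ∀ (st : List (Nat × Nat) × List (List Bool) × Int),
        l.foldl (seedStepA0 mine d) st = st := by
  intro l
  induction l with
  | nil => intro _ st; rfl
  | cons i l ih =>
    intro h st
    rw [List.foldl_cons, seedStepA0, if_neg (h i (by simp))]
    exact ih (fun j hj => h j (by simp [hj])) st

theorem fold1_id (mine : List (List Int)) (d : Int) (M : Nat) :
    ∀ (l : List Nat), (∀ i ∈ l, ¬(cellD mine i 0 ≤ d) ∧ ¬(cellD mine i (M - 1) ≤ d)) →
      ∀ (st : List (Nat × Nat) × List (List Bool) × Int),
        l.foldl (seedStepA1 mine d M) st = st := by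
  intro l
  induction l with
  | nil => intro _ st; rfl
  | cons i l ih =>
    intro h st
    have hstep : seedStepA1 mine d M st i = st := by
      rw [seedStepA1, if_neg (h i (by simp)).1]
      rw [if_neg (h i (by simp)).2]
    rw [List.foldl_cons, hstep]
    exact ih (fun j hj => h j (by simp [hj])) st

theorem foldB0_id (mine : List (List Int)) (d : Int) :
    ∀ (l : List Nat), (∀ i ∈ l, ¬(cellD mine 0 i ≤ d)) →
      ∀ (v : List (List Bool)), l.foldl (seedStepB0 mine d) v = v := by
  intro l
  induction l with
  | nil => intro _ v; rfl
  | cons i l ih =>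
    intro h v
    rw [List.foldl_cons, seedStepB0, if_neg (h i (by simp))]
    exact ih (fun j hj => h j (by simp [hj])) v

theorem foldB1_id (mine : List (List Int)) (d : Int) (M : Nat) :
    ∀ (l : List Nat), (∀ i ∈ l, ¬(cellD mine i 0 ≤ d) ∧ ¬(cellD mine i (M - 1) ≤ d)) →
      ∀ (v : List (List Bool)), l.foldl (seedStepB1 mine d M) v = v := by
  intro l
  induction l with
  | nil => intro _ v; rfl
  | cons i l ih =>
    intro h v
    have hstep : seedStepB1 mine d M v i = v := by
      rw [seedStepB1, if_neg (h i (by simp)).1]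
      rw [if_neg (h i (by simp)).2]
    rw [List.foldl_cons, hstep]
    exact ih (fun j hj => h j (by simp [hj])) v

theorem replicate_closed (mine : List (List Int)) (d : Int) (N M : Nat) :
    ClosedG mine d N M (List.replicate N (List.replicate M false)) := by
  intro r c a b hr hc _ _ _ hg _
  rw [g2_replicate N M r c hr hc] at hg
  cases hg

theorem mining_deg (mine : List (List Int)) (n m k d : Int)
    (h0 : ∀ c ∈ List.range m.toNat, ¬(cellD mine 0 c ≤ d))
    (h1 : ∀ i ∈ List.range' 1 (n.toNat - 1),
      ¬(cellD mine i 0 ≤ d) ∧ ¬(cellD mine i (m.toNat - 1) ≤ d)) :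
    mining mine n m k d = decide (k ≤ 0) := by
  rw [mining_def, ASt, fold0_id mine d _ h0, fold1_id mine d _ _ h1]
  exact bfsLoop_nil mine n.toNat m.toNat k d _ _ 0

theorem alt_deg (mine : List (List Int)) (n m k d : Int)
    (h0 : ∀ c ∈ List.range m.toNat, ¬(cellD mine 0 c ≤ d))
    (h1 : ∀ i ∈ List.range' 1 (n.toNat - 1),
      ¬(cellD mine i 0 ≤ d) ∧ ¬(cellD mine i (m.toNat - 1) ≤ d)) :
    mining_alt mine n m k d = decide (k ≤ 0) := by
  rw [alt_def, BSt, foldB0_id mine d _ h0, foldB1_id mine d _ _ h1]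
  have hid := satof_id_of_closed mine n.toNat m.toNat d _
    (replicate_closed mine d n.toNat m.toNat)
  rw [SatOf] at hid
  rw [hid, cnt2_replicate]
  norm_num

theorem mining_spec_core (mine : List (List Int)) (n m k d : Int)
    (hn : 1 ≤ n) (hm : 1 ≤ m) (hnd : ¬ D_mining mine n m k d) :
    mining mine n m k d = mining_alt mine n m k d := by
  have hN : 0 < n.toNat := by omega
  by_cases hm1 : m = 1
  · subst hm1
    have hM : (0 : Nat) < (1 : Int).toNat := by omega
    rw [mining_eq mine n 1 k d hN hM, alt_eq_sat]
    obtain ⟨q1, q2, q3⟩ := ASt_col mine d n.toNat hN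
    simp only [Int.toNat_one, satof_id_of_closed mine n.toNat 1 d _ q3, q1, q2]
    have e1 : (if cellD mine 0 0 ≤ d then (1 : Int) else 0) =
        (if (mine.getD 0 []).getD 0 0 ≤ d then (1 : Int) else 0) := rfl
    have e2 : (List.range' 1 (n.toNat - 1)).countP (fun i => decide (cellD mine i 0 ≤ d)) =
        (List.range' 1 (n.toNat - 1)).countP (fun i => decide ((mine.getD i []).getD 0 0 ≤ d)) := rfl
    have hstraddle : ¬((if (mine.getD 0 []).getD 0 0 ≤ d then (1 : Int) else 0) +
        (((List.range' 1 (n.toNat - 1)).countP (fun i => decide ((mine.getD i []).getD 0 0 ≤ d))) : Nat) < k ∧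
        k ≤ (if (mine.getD 0 []).getD 0 0 ≤ d then (1 : Int) else 0) +
        2 * (((List.range' 1 (n.toNat - 1)).countP (fun i => decide ((mine.getD i []).getD 0 0 ≤ d))) : Nat)) := by
      intro hstr
      exact hnd ⟨rfl, hn, hstr.1, hstr.2⟩
    rw [decide_eq_decide, e1, e2]
    omega
  · have hM2 : 2 ≤ m.toNat := by omega
    rw [mining_eq mine n m k d hN (by omega), alt_eq_sat]
    rw [ASt_delta mine d n.toNat m.toNat hN hM2]
    rw [decide_eq_decide]
    omega

theorem mining_tight_core (mine : List (List Int)) (n m k d : Int)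
    (hd : D_mining mine n m k d) :
    mining mine n m k d = true ∧ mining_alt mine n m k d = false := by
  obtain ⟨hm1, hn, hstr1, hstr2⟩ := hd
  subst hm1
  have hN : 0 < n.toNat := by omega
  have hM : (0 : Nat) < (1 : Int).toNat := by omega
  have e1 : (if cellD mine 0 0 ≤ d then (1 : Int) else 0) =
      (if (mine.getD 0 []).getD 0 0 ≤ d then (1 : Int) else 0) := rfl
  have e2 : (List.range' 1 (n.toNat - 1)).countP (fun i => decide (cellD mine i 0 ≤ d)) =
      (List.range' 1 (n.toNat - 1)).countP (fun i => decide ((mine.getD i []).getD 0 0 ≤ d)) := rfl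
  obtain ⟨q1, q2, q3⟩ := ASt_col mine d n.toNat hN
  constructor
  · rw [mining_eq mine n 1 k d hN hM]
    simp only [Int.toNat_one, satof_id_of_closed mine n.toNat 1 d _ q3, q1]
    rw [e1, e2]
    simp only [decide_eq_true_eq]
    omega
  · rw [alt_eq_sat]
    simp only [Int.toNat_one, satof_id_of_closed mine n.toNat 1 d _ q3, q2]
    rw [e1, e2]
    simp only [decide_eq_false_iff_not]
    omega

-- ===== VERDICT (by name: the statement is the Claim_ definition above) =====
theorem mining_spec : Claim_unchanged_mining := by
  intro mine n m k d _ hpre hnd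
  rcases hpre with ⟨hn, hm, _, _⟩ | ⟨hn, hm⟩ | ⟨hn, hm, hl, hw, hv⟩ | ⟨hn, hm, hrows⟩
  · exact mining_spec_core mine n m k d hn hm hnd
  · have hM : m.toNat = 0 := by omega
    have hN : n.toNat = 0 := by omega
    rw [mining_deg mine n m k d (by rw [hM]; intro c hc; simp at hc)
        (by rw [hN]; intro i hi; simp at hi),
      alt_deg mine n m k d (by rw [hM]; intro c hc; simp at hc)
        (by rw [hN]; intro i hi; simp at hi)]
  · have hN : n.toNat = 0 := by omega
    have h0 : ∀ c ∈ List.range m.toNat, ¬(cellD mine 0 c ≤ d) := by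
      intro c hc
      exact hv c (List.mem_range.1 hc)
    rw [mining_deg mine n m k d h0 (by rw [hN]; intro i hi; simp at hi),
      alt_deg mine n m k d h0 (by rw [hN]; intro i hi; simp at hi)]
  · have hM : m.toNat = 0 := by omega
    have h1 : ∀ i ∈ List.range' 1 (n.toNat - 1),
        ¬(cellD mine i 0 ≤ d) ∧ ¬(cellD mine i (m.toNat - 1) ≤ d) := by
      intro i hi
      rw [List.mem_range'] at hi
      obtain ⟨j, hj, e⟩ := hi
      have := hrows i (by omega) (by omega)
      have hc0 : ¬(cellD mine i 0 ≤ d) := this.2.2.1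
      refine ⟨hc0, ?_⟩
      rw [hM]
      exact hc0
    rw [mining_deg mine n m k d (by rw [hM]; intro c hc; simp at hc) h1,
      alt_deg mine n m k d (by rw [hM]; intro c hc; simp at hc) h1]
theorem mining_changed : Claim_changed_mining := by unfold Claim_changed_mining; decide
theorem mining_tight : Claim_exact_mining := by
  intro mine n m k d _ _ hd
  obtain ⟨h1, h2⟩ := mining_tight_core mine n m k d hd
  rw [h1, h2]
  simp
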